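-- pv_equiv track=rewrite | github.com/k-harada/AtCoder | ABC/ABC251-300/ABC289/E.py | solve_sub
-- ===== SOURCE A (Python) =====
-- from collections import deque
--
-- def solve_sub(n, m, c_list, uv_list):
--     g = [[] for _ in range(n + 1)]
--     for u, v in uv_list:
--         g[u].append(v)
--         g[v].append(u)
--     queue = deque([(1, n)])
--     d_list = [[-1] * (n + 1) for _ in range(n + 1)]
--     d_list[1][n] = 0
--     while len(queue):
--         p, q = queue.popleft()
--         for r in g[p]:
--             for s in g[q]:
--                 if c_list[r - 1] == c_list[s - 1]:
--                     continue
--                 if d_list[r][s] == -1: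
--                     d_list[r][s] = d_list[p][q] + 1
--                     queue.append((r, s))
--     return d_list[n][1]
-- ===== SOURCE B (Python) =====
-- def solve_sub(n, m, c_list, uv_list):
--     g = [[] for _ in range(n + 1)]
--     for u, v in uv_list:
--         g[u].append(v)
--         g[v].append(u)
--     verts = [v for v in range(n + 1) if g[v]]
--     d = [[-1] * (n + 1) for _ in range(n + 1)]
--     d[1][n] = 0
--     for level in range(1, (n + 1) * (n + 1) + 1):
--         updates = [(r, s)
--                    for r in verts for s in verts
--                    if d[r][s] == -1
--                    and any(d[p][q] != -1 for p in g[r] for q in g[s])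
--                    and c_list[r - 1] != c_list[s - 1]]
--         if not updates:
--             break
--         for r, s in updates:
--             d[r][s] = level
--     return d[n][1]
-- ===== Notes on version B (the rewrite author's own statement) =====
-- stated objective: alternative
-- what changed: The worklist BFS (a deque of discovered states, each popped state pushing its neighbour pairs with the distance read back from the parent's stored entry) is replaced by a queueless dynamic-programming grid relaxation: repeated whole-grid Jacobi sweeps over the occupied vertices that pull each still-undiscovered cell from its already-discovered predecessor cells, writing the level counter and stopping at the first unproductive sweep.
-- outside the precondition, e.g. on solve_sub(2, 1, [1, 2], [(1, -1)]): A returns -1, B returns 1; on solve_sub(2, 0, [2], [(0, 2), (1, 1), (0, 2)]): A returns -1, B returns -1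
import Mathlib
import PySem

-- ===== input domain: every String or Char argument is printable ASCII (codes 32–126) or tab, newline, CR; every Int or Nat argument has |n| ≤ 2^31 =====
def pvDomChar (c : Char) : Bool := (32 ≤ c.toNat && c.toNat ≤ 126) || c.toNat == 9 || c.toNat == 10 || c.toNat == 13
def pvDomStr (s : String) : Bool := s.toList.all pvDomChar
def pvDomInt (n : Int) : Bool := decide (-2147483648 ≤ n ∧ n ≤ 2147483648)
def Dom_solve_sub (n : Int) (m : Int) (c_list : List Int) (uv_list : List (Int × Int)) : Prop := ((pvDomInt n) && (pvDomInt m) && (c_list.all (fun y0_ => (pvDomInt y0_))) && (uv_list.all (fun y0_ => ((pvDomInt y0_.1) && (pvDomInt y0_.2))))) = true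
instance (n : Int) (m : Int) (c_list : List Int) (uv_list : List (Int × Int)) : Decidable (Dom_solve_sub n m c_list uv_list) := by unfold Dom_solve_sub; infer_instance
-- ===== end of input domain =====

-- B replaces A's worklist BFS (a deque of discovered states pushing neighbour pairs) by a
-- queueless dynamic-programming grid relaxation: whole-grid Jacobi sweeps that pull each
-- undiscovered cell from its discovered predecessors, until a sweep changes nothing
-- (objective: alternative).

-- Shared low-level index helpers (both Pythons use the same list indexing / grid assignment;
-- pyIdx-based getD/set are exact under Pre_, where every index used lies in Python's valid
-- range -len ≤ i < len, negative indices wrapping).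
-- Python's effective list index (exact for -len ≤ i: negative indices wrap)
def pyIdx (len : Nat) (i : Int) : Nat := if i < 0 then (i + len).toNat else i.toNat
def dget (d : List (List Int)) (r s : Int) : Int :=
  (d.getD (pyIdx d.length r) []).getD (pyIdx (d.getD (pyIdx d.length r) []).length s) (-1)
def dset (d : List (List Int)) (r s : Int) (v : Int) : List (List Int) :=
  d.set (pyIdx d.length r)
    ((d.getD (pyIdx d.length r) []).set (pyIdx (d.getD (pyIdx d.length r) []).length s) v)
def cget (c : List Int) (r : Int) : Int := c.getD (pyIdx c.length (r - 1)) 0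
def gget (g : List (List Int)) (p : Int) : List Int := g.getD (pyIdx g.length p) []
def buildG (n : Int) (uv : List (Int × Int)) : List (List Int) :=
  uv.foldl (fun g e =>
    let g1 := g.set (pyIdx g.length e.1) ((gget g e.1) ++ [e.2])
    g1.set (pyIdx g1.length e.2) ((gget g1 e.2) ++ [e.1]))
    (List.replicate (n + 1).toNat [])

-- ===== PORT A =====
-- A's while loop over the deque; fuel bounds the number of pops ((n+1)^2+2 provably suffices).
def loopA (g : List (List Int)) (c : List Int) : Nat → List (Int × Int) → List (List Int) → List (List Int)
  | 0, _, d => d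
  | _ + 1, [], d => d
  | fuel + 1, (p, q) :: rest, d =>
      let st := (gget g p).foldl (fun acc r =>
        (gget g q).foldl (fun acc s =>
          if cget c r == cget c s then acc
          else if dget acc.1 r s == -1 then (dset acc.1 r s (dget acc.1 p q + 1), acc.2 ++ [(r, s)])
          else acc) acc) (d, ([] : List (Int × Int)))
      loopA g c fuel (rest ++ st.2) st.1

def solve_sub (n : Int) (m : Int) (c_list : List Int) (uv_list : List (Int × Int)) : Int :=
  let g := buildG n uv_list
  let d0 := dset (List.replicate (n + 1).toNat (List.replicate (n + 1).toNat (-1))) 1 n 0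
  let d := loopA g c_list ((n + 1).toNat * (n + 1).toNat + 2) [(1, n)] d0
  dget d n 1

-- ===== PORT B =====
-- the vertices worth scanning: rows with a non-empty adjacency list ('if g[v]')
def vertsL (n : Int) (g : List (List Int)) : List Int :=
  (PySem.List.pyRange 0 (n + 1) 1).foldl
    (fun acc v => if !(gget g v).isEmpty then acc ++ [v] else acc) []

-- one Jacobi sweep: the list of still-undiscovered cells that have a discovered
-- predecessor pair and differing colors (B's list comprehension)
def sweepUpd (verts : List Int) (g : List (List Int)) (c : List Int) (d : List (List Int)) : List (Int × Int) :=
  verts.foldl (fun acc r =>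
    verts.foldl (fun acc s =>
      if (dget d r s == -1)
          && ((gget g r).any (fun p => (gget g s).any (fun q => !(dget d p q == -1))))
          && (!(cget c r == cget c s))
      then acc ++ [(r, s)] else acc) acc) []

-- apply one sweep's updates ('for r, s in updates: d[r][s] = level')
def writeUpd (d : List (List Int)) (lvl : Int) (u : List (Int × Int)) : List (List Int) :=
  u.foldl (fun d rs => dset d rs.1 rs.2 lvl) d

-- B's for-loop over levels with early break on an unproductive sweep
def loopJ (verts : List Int) (g : List (List Int)) (c : List Int) : List Int → List (List Int) → List (List Int)
  | [], d => d
  | lvl :: rest, d =>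
      let u := sweepUpd verts g c d
      if u.isEmpty then d else loopJ verts g c rest (writeUpd d lvl u)

def solve_sub_alt (n : Int) (m : Int) (c_list : List Int) (uv_list : List (Int × Int)) : Int :=
  let g := buildG n uv_list
  let verts := vertsL n g
  let d0 := dset (List.replicate (n + 1).toNat (List.replicate (n + 1).toNat (-1))) 1 n 0
  let d := loopJ verts g c_list (PySem.List.pyRange 1 ((n + 1) * (n + 1) + 1) 1) d0
  dget d n 1

-- ===== PRECONDITION & SPEC =====
-- Pre_ = 1 ≤ n, every edge endpoint a valid Python index into the n+1 rows, and — only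
-- when some edge touches the start rows (row 1 AND row n, possibly through a negative
-- alias; otherwise the BFS scans no pair and no colour is ever read) — all endpoints
-- non-negative with their colour lookups c_list[e-1] in range.  This excludes (a) inputs
-- where A would raise an IndexError on a colour lookup it performs, (b) reachable
-- configurations with negative (wrap-around) endpoints, where A's colour lookups are
-- keyed by whichever literal alias reaches a state first — an accident of A's encoding
-- (cite 1: A and B return different values there), and (c), slightly over-excluded,
-- inputs whose offending endpoint the BFS never actually scans (cite 2, same value).
def Pre_solve_sub (n : Int) (m : Int) (c_list : List Int) (uv_list : List (Int × Int)) : Prop :=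
  1 ≤ n ∧
  (∀ e ∈ uv_list, (-(n + 1) ≤ e.1 ∧ e.1 ≤ n) ∧ (-(n + 1) ≤ e.2 ∧ e.2 ≤ n)) ∧
  (((∃ e ∈ uv_list, e.1 = 1 ∨ e.1 = -n ∨ e.2 = 1 ∨ e.2 = -n) ∧
    (∃ e ∈ uv_list, e.1 = n ∨ e.1 = -1 ∨ e.2 = n ∨ e.2 = -1)) →
   ∀ e ∈ uv_list,
     (0 ≤ e.1 ∧ -(c_list.length : Int) ≤ e.1 - 1 ∧ e.1 - 1 < (c_list.length : Int)) ∧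
     (0 ≤ e.2 ∧ -(c_list.length : Int) ≤ e.2 - 1 ∧ e.2 - 1 < (c_list.length : Int)))
instance (n : Int) (m : Int) (c_list : List Int) (uv_list : List (Int × Int)) : Decidable (Pre_solve_sub n m c_list uv_list) := by unfold Pre_solve_sub; infer_instance

def pvWitness_solve_sub : Int × Int × List Int × (List (Int × Int)) := (2, 1, [1, 2], [(1, 2)])

def Spec_solve_sub (n : Int) (m : Int) (c_list : List Int) (uv_list : List (Int × Int)) (out : Int) : Prop := out = solve_sub_alt n m c_list uv_list
instance (n : Int) (m : Int) (c_list : List Int) (uv_list : List (Int × Int)) (out : Int) : Decidable (Spec_solve_sub n m c_list uv_list out) := by unfold Spec_solve_sub; infer_instance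

-- ===== CLAIM (what is proved, stated in full; the proofs are below) =====
def Claim_equal_solve_sub : Prop := ∀ (n : Int) (m : Int) (c_list : List Int) (uv_list : List (Int × Int)), Dom_solve_sub n m c_list uv_list → Pre_solve_sub n m c_list uv_list → Spec_solve_sub n m c_list uv_list (solve_sub n m c_list uv_list)

-- ===== LEMMAS AND PROOFS =====

-- A's per-popped-node state transformer and the level-synchronized loop (the bridge
-- between A's queue and B's sweeps)
def nodeB (g : List (List Int)) (c : List Int) (w : Int)
    (st : List (List Int) × List (Int × Int)) (pq : Int × Int) : List (List Int) × List (Int × Int) :=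
  (gget g pq.1).foldl (fun st r =>
    (gget g pq.2).foldl (fun st s =>
      if (!(cget c r == cget c s)) && (dget st.1 r s == -1)
      then (dset st.1 r s w, st.2 ++ [(r, s)]) else st) st) st

def nodeA (g : List (List Int)) (c : List Int) (p q : Int)
    (st : List (List Int) × List (Int × Int)) : List (List Int) × List (Int × Int) :=
  (gget g p).foldl (fun acc r =>
    (gget g q).foldl (fun acc s =>
      if cget c r == cget c s then acc
      else if dget acc.1 r s == -1 then (dset acc.1 r s (dget acc.1 p q + 1), acc.2 ++ [(r, s)])
      else acc) acc) st

def loopL (g : List (List Int)) (c : List Int) : Nat → List (Int × Int) → List (List Int) → Int → List (List Int)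
  | 0, _, d, _ => d
  | _ + 1, [], d, _ => d
  | fuel + 1, f, d, dist =>
      let st := f.foldl (nodeB g c (dist + 1)) (d, ([] : List (Int × Int)))
      loopL g c fuel st.2 st.1 (dist + 1)

def shapeG (N : Nat) (d : List (List Int)) : Prop := d.length = N ∧ ∀ row ∈ d, row.length = N

def cntNeg (d : List (List Int)) : Nat := (d.map (fun row => row.count (-1))).sum

lemma shape_row {N : Nat} {d : List (List Int)} (h : shapeG N d) {i : Nat} (hi : i < N) :
    (d.getD i []).length = N := by
  have hlen : i < d.length := by rw [h.1]; exact hi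
  rw [List.getD_eq_getElem?_getD, List.getElem?_eq_getElem hlen]
  exact h.2 _ (List.getElem_mem hlen)

lemma dget_congr {N : Nat} {d : List (List Int)} (hsh : shapeG N d) {x y r s : Int}
    (hrange : pyIdx N r < N) (hx : pyIdx N x = pyIdx N r) (hy : pyIdx N y = pyIdx N s) :
    dget d x y = dget d r s := by
  unfold dget
  rw [hsh.1, hx, shape_row hsh hrange, hy]

lemma getD_set_self {A : Type} (l : List A) (i : Nat) (x d0 : A) (h : i < l.length) :
    (l.set i x).getD i d0 = x := by
  rw [List.getD_eq_getElem?_getD, List.getElem?_set_self (by simpa using h)]; rfl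

lemma getD_set_ne {A : Type} (l : List A) {i j : Nat} (x d0 : A) (h : i ≠ j) :
    (l.set i x).getD j d0 = l.getD j d0 := by
  rw [List.getD_eq_getElem?_getD, List.getElem?_set_ne h, ← List.getD_eq_getElem?_getD]

lemma dget_dset_self {N : Nat} {d : List (List Int)} (hsh : shapeG N d) {r s v : Int}
    (hr : pyIdx N r < N) (hs : pyIdx N s < N) :
    dget (dset d r s v) r s = v := by
  unfold dget dset
  have hrow : (d.getD (pyIdx N r) []).length = N := shape_row hsh hr
  rw [List.length_set, hsh.1, hrow]
  rw [getD_set_self _ _ _ _ (show pyIdx N r < d.length by rw [hsh.1]; exact hr)]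
  rw [List.length_set, hrow]
  exact getD_set_self _ _ _ _ (by rw [hrow]; exact hs)

lemma dget_dset_ne {N : Nat} {d : List (List Int)} (hsh : shapeG N d) {r s p q v : Int}
    (h : ¬(pyIdx N r = pyIdx N p ∧ pyIdx N s = pyIdx N q)) :
    dget (dset d r s v) p q = dget d p q := by
  unfold dget dset
  rw [List.length_set, hsh.1]
  by_cases hrp : pyIdx N r = pyIdx N p
  · have hsq : pyIdx N s ≠ pyIdx N q := fun hq => h ⟨hrp, hq⟩
    by_cases hlt : pyIdx N p < N
    · have hrowp : (d.getD (pyIdx N p) []).length = N := shape_row hsh hlt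
      rw [hrp, hrowp]
      rw [getD_set_self _ _ _ _ (show pyIdx N p < d.length by rw [hsh.1]; exact hlt)]
      rw [List.length_set, hrowp]
      rw [getD_set_ne _ _ _ hsq]
    · rw [List.set_eq_of_length_le (by rw [hsh.1]; omega)]
  · rw [getD_set_ne _ _ _ hrp]

lemma shape_dset {N : Nat} {d : List (List Int)} {r s v : Int} (h : shapeG N d) :
    shapeG N (dset d r s v) := by
  unfold dset
  by_cases hlt : pyIdx d.length r < d.length
  · refine ⟨by simpa using h.1, ?_⟩
    intro row hrow
    rcases List.mem_or_eq_of_mem_set hrow with hm | he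
    · exact h.2 _ hm
    · rw [he, List.length_set]
      exact shape_row h (by rw [← h.1]; exact hlt)
  · rw [List.set_eq_of_length_le (by omega)]; exact h

lemma count_neg_set_eq (l : List Int) (i : Nat) (v : Int) (hv : v ≠ -1)
    (hi : i < l.length) (hold : l.getD i 0 = -1) :
    (l.set i v).count (-1) + 1 = l.count (-1) := by
  induction l generalizing i with
  | nil => simp at hi
  | cons a t ih =>
    cases i with
    | zero =>
      simp only [List.getD_cons_zero] at hold
      simp [hold, hv]
    | succ j =>
      simp only [List.getD_cons_succ] at hold
      simp only [List.set_cons_succ, List.count_cons]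
      have := ih j (by simpa using hi) hold
      split <;> omega

lemma cntNeg_set (d : List (List Int)) (i : Nat) (row' : List Int) (h : i < d.length) :
    cntNeg (d.set i row') + (d.getD i []).count (-1) = cntNeg d + row'.count (-1) := by
  induction d generalizing i with
  | nil => simp at h
  | cons a t ih =>
    cases i with
    | zero => simp [cntNeg]; omega
    | succ j =>
      simp only [List.set_cons_succ, List.getD_cons_succ]
      have := ih j (by simpa using h)
      simp only [cntNeg, List.map_cons, List.sum_cons] at *
      omega

lemma cntNeg_dset_eq {N : Nat} (d : List (List Int)) (hsh : shapeG N d) (r s v : Int)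
    (hv : v ≠ -1) (hr : pyIdx N r < N) (hs : pyIdx N s < N)
    (hold : dget d r s = -1) :
    cntNeg (dset d r s v) + 1 = cntNeg d := by
  unfold dset
  have hrow : (d.getD (pyIdx d.length r) []).length = N := by
    rw [hsh.1]; exact shape_row hsh hr
  have hr' : pyIdx d.length r < d.length := by rw [hsh.1]; exact hr
  have hs' : pyIdx (d.getD (pyIdx d.length r) []).length s
      < (d.getD (pyIdx d.length r) []).length := by rw [hrow]; exact hs
  have h1 := cntNeg_set d (pyIdx d.length r)
    ((d.getD (pyIdx d.length r) []).set
      (pyIdx (d.getD (pyIdx d.length r) []).length s) v) hr'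
  have hold' : (d.getD (pyIdx d.length r) []).getD
      (pyIdx (d.getD (pyIdx d.length r) []).length s) 0 = -1 := by
    unfold dget at hold
    rw [List.getD_eq_getElem?_getD, List.getElem?_eq_getElem (by simpa using hs')] at hold ⊢
    simpa using hold
  have h2 := count_neg_set_eq (d.getD (pyIdx d.length r) [])
    (pyIdx (d.getD (pyIdx d.length r) []).length s) v hv hs' hold'
  omega

lemma cntNeg_replicate (N : Nat) :
    cntNeg (List.replicate N (List.replicate N (-1 : Int))) = N * N := by
  simp [cntNeg, List.map_replicate, List.sum_replicate, smul_eq_mul]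

lemma loopA_cons (g : List (List Int)) (c : List Int) (fuel : Nat) (p q : Int)
    (rest : List (Int × Int)) (d : List (List Int)) :
    loopA g c (fuel + 1) ((p, q) :: rest) d
      = loopA g c fuel (rest ++ (nodeA g c p q (d, [])).2) (nodeA g c p q (d, [])).1 := rfl

-- the invariant carried through one BFS level (dref is the grid at the start of the level)
def PInv (N : Nat) (dref : List (List Int)) (K : Nat) (dist : Int)
    (st : List (List Int) × List (Int × Int)) : Prop :=
  shapeG N st.1 ∧
  (∀ x y : Int, dget dref x y ≠ -1 → dget st.1 x y = dget dref x y) ∧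
  (∀ a ∈ st.2, dget st.1 a.1 a.2 = dist + 1) ∧
  cntNeg st.1 + st.2.length ≤ K

lemma relax_step (N : Nat) (dref : List (List Int)) (K : Nat) (dist : Int) (hdist : 0 ≤ dist)
    (c : List Int) (p q : Int) (hpq : dget dref p q = dist)
    (r s : Int) (hr : pyIdx N r < N) (hs : pyIdx N s < N)
    (st : List (List Int) × List (Int × Int)) (hP : PInv N dref K dist st) :
    PInv N dref K dist
      (if (!(cget c r == cget c s)) && (dget st.1 r s == -1)
       then (dset st.1 r s (dist + 1), st.2 ++ [(r, s)]) else st) ∧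
    (if cget c r == cget c s then st
     else if dget st.1 r s == -1 then (dset st.1 r s (dget st.1 p q + 1), st.2 ++ [(r, s)])
     else st)
      = (if (!(cget c r == cget c s)) && (dget st.1 r s == -1)
         then (dset st.1 r s (dist + 1), st.2 ++ [(r, s)]) else st) := by
  obtain ⟨hsh, hpres, hitems, hcnt⟩ := hP
  have hpq' : dget st.1 p q = dist := by
    rw [hpres p q (by rw [hpq]; omega)]; exact hpq
  by_cases hc : cget c r == cget c s
  · rw [if_neg (by simp [hc] : ¬ ((!(cget c r == cget c s)) && (dget st.1 r s == -1)) = true),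
      if_pos hc]
    exact ⟨⟨hsh, hpres, hitems, hcnt⟩, rfl⟩
  · by_cases hd : dget st.1 r s == -1
    · have hd' : dget st.1 r s = -1 := by simpa using hd
      have hcond : ((!(cget c r == cget c s)) && (dget st.1 r s == -1)) = true := by
        simp only [Bool.and_eq_true, Bool.not_eq_true']
        exact ⟨by simpa using hc, hd⟩
      have hcell : ∀ x y : Int, dget st.1 x y ≠ -1 →
          dget (dset st.1 r s (dist + 1)) x y = dget st.1 x y := by
        intro x y hxy
        by_cases hcc : pyIdx N r = pyIdx N x ∧ pyIdx N s = pyIdx N y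
        · exact absurd (by rw [dget_congr hsh hr hcc.1.symm hcc.2.symm]; exact hd') hxy
        · exact dget_dset_ne hsh hcc
      rw [if_pos hcond, if_neg (by simpa using hc), if_pos hd]
      refine ⟨⟨?_, ?_, ?_, ?_⟩, ?_⟩
      · exact shape_dset hsh
      · intro x y hxy
        rw [hcell x y (by rw [hpres x y hxy]; exact hxy), hpres x y hxy]
      · intro a ha
        rcases List.mem_append.1 ha with ha | ha
        · rw [hcell a.1 a.2 (by rw [hitems a ha]; omega)]; exact hitems a ha
        · simp only [List.mem_singleton] at ha
          rw [ha]
          exact dget_dset_self hsh hr hs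
      · have := cntNeg_dset_eq st.1 hsh r s (dist + 1) (by omega) hr hs hd'
        simp only [List.length_append, List.length_singleton]
        omega
      · rw [hpq']
    · rw [if_neg (by simp [hd]), if_neg (by simpa using hc), if_neg hd]
      exact ⟨⟨hsh, hpres, hitems, hcnt⟩, rfl⟩

-- a state-transformer only appends to the .2 component and its .1 action ignores .2
def OutStep {A : Type} (f : (List (List Int) × List (Int × Int)) → A → (List (List Int) × List (Int × Int))) : Prop :=
  ∀ (d : List (List Int)) (o : List (Int × Int)) (a : A),
    f (d, o) a = ((f (d, []) a).1, o ++ (f (d, []) a).2)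

lemma foldl_out {A : Type} (f : (List (List Int) × List (Int × Int)) → A → (List (List Int) × List (Int × Int)))
    (hf : OutStep f) (L : List A) :
    ∀ (d : List (List Int)) (o : List (Int × Int)),
      L.foldl f (d, o) = ((L.foldl f (d, [])).1, o ++ (L.foldl f (d, [])).2) := by
  induction L with
  | nil => intro d o; simp
  | cons a L ih =>
    intro d o
    rcases hFa : f (d, []) a with ⟨D1, O1⟩
    simp only [List.foldl_cons]
    rw [hf d o a, hFa]
    simp only
    rw [ih D1 (o ++ O1), ih D1 O1]
    simp [List.append_assoc]

lemma outStep_inner (c : List Int) (w : Int) (r : Int) :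
    OutStep (fun st s => if (!(cget c r == cget c s)) && (dget st.1 r s == -1)
      then (dset st.1 r s w, st.2 ++ [(r, s)]) else st) := by
  intro d o a
  by_cases h : ((!(cget c r == cget c a)) && (dget d r a == -1)) = true
  · simp [h]
  · simp [h]

lemma outStep_mid (g : List (List Int)) (c : List Int) (w : Int) (q : Int) :
    OutStep (fun st (r : Int) => (gget g q).foldl (fun st s =>
      if (!(cget c r == cget c s)) && (dget st.1 r s == -1)
      then (dset st.1 r s w, st.2 ++ [(r, s)]) else st) st) := by
  intro d o r
  exact foldl_out _ (outStep_inner c w r) _ d o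

lemma outStep_nodeB (g : List (List Int)) (c : List Int) (w : Int) :
    OutStep (nodeB g c w) := by
  intro d o pq
  exact foldl_out _ (outStep_mid g c w pq.2) _ d o

lemma fold_inner (N : Nat) (dref : List (List Int)) (K : Nat) (dist : Int) (hdist : 0 ≤ dist)
    (c : List Int) (p q : Int) (hpq : dget dref p q = dist)
    (r : Int) (hr : pyIdx N r < N) (L : List Int) (hL : ∀ x ∈ L, pyIdx N x < N) :
    ∀ (st : List (List Int) × List (Int × Int)), PInv N dref K dist st →
      PInv N dref K dist (L.foldl (fun st s =>
          if (!(cget c r == cget c s)) && (dget st.1 r s == -1)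
          then (dset st.1 r s (dist + 1), st.2 ++ [(r, s)]) else st) st) ∧
      L.foldl (fun acc s =>
          if cget c r == cget c s then acc
          else if dget acc.1 r s == -1 then (dset acc.1 r s (dget acc.1 p q + 1), acc.2 ++ [(r, s)])
          else acc) st
        = L.foldl (fun st s =>
          if (!(cget c r == cget c s)) && (dget st.1 r s == -1)
          then (dset st.1 r s (dist + 1), st.2 ++ [(r, s)]) else st) st := by
  induction L with
  | nil => intro st hP; exact ⟨hP, rfl⟩
  | cons s L ih =>
    intro st hP
    have hstep := relax_step N dref K dist hdist c p q hpq r s hr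
      (hL s (List.mem_cons_self)) st hP
    have ihh := ih (fun x hx => hL x (List.mem_cons_of_mem _ hx)) _ hstep.1
    simp only [List.foldl_cons]
    rw [hstep.2]
    exact ihh

lemma node_step (N : Nat) (dref : List (List Int)) (K : Nat) (dist : Int) (hdist : 0 ≤ dist)
    (g : List (List Int)) (c : List Int)
    (Gb : ∀ (p x : Int), x ∈ gget g p → pyIdx N x < N)
    (pq : Int × Int) (hpq : dget dref pq.1 pq.2 = dist) :
    ∀ (st : List (List Int) × List (Int × Int)), PInv N dref K dist st →
      PInv N dref K dist (nodeB g c (dist + 1) st pq) ∧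
      nodeA g c pq.1 pq.2 st = nodeB g c (dist + 1) st pq := by
  have hmain : ∀ (L1 : List Int), (∀ x ∈ L1, pyIdx N x < N) →
      ∀ st, PInv N dref K dist st →
      PInv N dref K dist (L1.foldl (fun st r => (gget g pq.2).foldl (fun st s =>
          if (!(cget c r == cget c s)) && (dget st.1 r s == -1)
          then (dset st.1 r s (dist + 1), st.2 ++ [(r, s)]) else st) st) st) ∧
      L1.foldl (fun acc r => (gget g pq.2).foldl (fun acc s =>
          if cget c r == cget c s then acc
          else if dget acc.1 r s == -1
          then (dset acc.1 r s (dget acc.1 pq.1 pq.2 + 1), acc.2 ++ [(r, s)]) else acc) acc) st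
        = L1.foldl (fun st r => (gget g pq.2).foldl (fun st s =>
          if (!(cget c r == cget c s)) && (dget st.1 r s == -1)
          then (dset st.1 r s (dist + 1), st.2 ++ [(r, s)]) else st) st) st := by
    intro L1 hL1
    induction L1 with
    | nil => intro st hP; exact ⟨hP, rfl⟩
    | cons r L1 ih =>
      intro st hP
      have hstep := fold_inner N dref K dist hdist c pq.1 pq.2 hpq r
        (hL1 r (List.mem_cons_self)) (gget g pq.2) (fun x hx => Gb pq.2 x hx) st hP
      have ihh := ih (fun x hx => hL1 x (List.mem_cons_of_mem _ hx)) _ hstep.1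
      simp only [List.foldl_cons]
      rw [hstep.2]
      exact ihh
  intro st hP
  exact hmain (gget g pq.1) (fun x hx => Gb pq.1 x hx) st hP

lemma levelP (N : Nat) (dref : List (List Int)) (K : Nat) (dist : Int) (hdist : 0 ≤ dist)
    (g : List (List Int)) (c : List Int)
    (Gb : ∀ (p x : Int), x ∈ gget g p → pyIdx N x < N) :
    ∀ (f : List (Int × Int)) (st : List (List Int) × List (Int × Int)),
      PInv N dref K dist st → (∀ pq ∈ f, dget dref pq.1 pq.2 = dist) →
      PInv N dref K dist (f.foldl (nodeB g c (dist + 1)) st) := by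
  intro f
  induction f with
  | nil => intro st hP _; exact hP
  | cons pq f' ih =>
    intro st hP hf
    simp only [List.foldl_cons]
    exact ih _ ((node_step N dref K dist hdist g c Gb pq (hf pq List.mem_cons_self) st hP).1)
      (fun x hx => hf x (List.mem_cons_of_mem _ hx))

lemma levelA (N : Nat) (dref : List (List Int)) (K : Nat) (dist : Int) (hdist : 0 ≤ dist)
    (g : List (List Int)) (c : List Int)
    (Gb : ∀ (p x : Int), x ∈ gget g p → pyIdx N x < N) :
    ∀ (f : List (Int × Int)) (st : List (List Int) × List (Int × Int)) (kA : Nat),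
      PInv N dref K dist st → (∀ pq ∈ f, dget dref pq.1 pq.2 = dist) →
      loopA g c (f.length + kA) (f ++ st.2) st.1
        = loopA g c kA (f.foldl (nodeB g c (dist + 1)) st).2 (f.foldl (nodeB g c (dist + 1)) st).1 := by
  intro f
  induction f with
  | nil => intro st kA _ _; simp
  | cons pq f' ih =>
    rcases pq with ⟨p, q⟩
    intro st kA hP hf
    have hP0 : PInv N dref K dist (st.1, []) := by
      obtain ⟨hsh, hpres, _, hcnt⟩ := hP
      exact ⟨hsh, hpres, by simp, by simp; omega⟩
    have hn := node_step N dref K dist hdist g c Gb (p, q)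
      (hf (p, q) List.mem_cons_self) (st.1, []) hP0
    have hP' := (node_step N dref K dist hdist g c Gb (p, q)
      (hf (p, q) List.mem_cons_self) st hP).1
    have ho := outStep_nodeB g c (dist + 1) st.1 st.2 (p, q)
    have ho' : nodeB g c (dist + 1) st (p, q)
        = ((nodeB g c (dist + 1) (st.1, []) (p, q)).1,
           st.2 ++ (nodeB g c (dist + 1) (st.1, []) (p, q)).2) := ho
    have h1 : (nodeB g c (dist + 1) st (p, q)).1
        = (nodeB g c (dist + 1) (st.1, []) (p, q)).1 := by rw [ho']
    have h2 : (nodeB g c (dist + 1) st (p, q)).2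
        = st.2 ++ (nodeB g c (dist + 1) (st.1, []) (p, q)).2 := by rw [ho']
    simp only [List.length_cons, List.foldl_cons, List.cons_append]
    rw [show f'.length + 1 + kA = (f'.length + kA) + 1 from by omega]
    rw [loopA_cons]
    rw [show nodeA g c p q (st.1, []) = nodeB g c (dist + 1) (st.1, []) (p, q) from hn.2]
    rw [List.append_assoc, ← h2, ← h1]
    exact ih (nodeB g c (dist + 1) st (p, q)) kA hP'
      (fun x hx => hf x (List.mem_cons_of_mem _ hx))

lemma mainL (N : Nat) (g : List (List Int)) (c : List Int)
    (Gb : ∀ (p x : Int), x ∈ gget g p → pyIdx N x < N) :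
    ∀ (cbound : Nat), ∀ (kA kB : Nat) (f : List (Int × Int)) (d : List (List Int)) (dist : Int),
      shapeG N d → 0 ≤ dist → (∀ pq ∈ f, dget d pq.1 pq.2 = dist) → cntNeg d ≤ cbound →
      f.length + cbound + 1 ≤ kA → cbound + 2 ≤ kB →
      loopA g c kA f d = loopL g c kB f d dist := by
  intro cbound
  induction cbound using Nat.strong_induction_on with
  | _ cbound IH =>
    intro kA kB f d dist hsh hdist hf hcnt hkA hkB
    cases f with
    | nil => cases kA <;> cases kB <;> simp [loopA, loopL]
    | cons pq f' =>
      rcases pq with ⟨p, q⟩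
      have hP0 : PInv N d (cntNeg d) dist (d, []) :=
        ⟨hsh, fun _ _ _ => rfl, by simp, by simp⟩
      have hPE := levelP N d (cntNeg d) dist hdist g c Gb ((p, q) :: f') (d, []) hP0 hf
      obtain ⟨kB', rfl⟩ : ∃ kB', kB = kB' + 1 := ⟨kB - 1, by omega⟩
      have hB : loopL g c (kB' + 1) ((p, q) :: f') d dist
          = loopL g c kB' (((p, q) :: f').foldl (nodeB g c (dist + 1)) (d, [])).2
              (((p, q) :: f').foldl (nodeB g c (dist + 1)) (d, [])).1 (dist + 1) := rfl
      simp only [List.length_cons] at hkA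
      obtain ⟨kA', rfl⟩ : ∃ kA', kA = (f'.length + 1) + kA' :=
        ⟨kA - (f'.length + 1), by omega⟩
      have hA := levelA N d (cntNeg d) dist hdist g c Gb ((p, q) :: f') (d, []) kA' hP0 hf
      rw [List.append_nil] at hA
      simp only [List.length_cons] at hA
      rw [hA, hB]
      obtain ⟨hshE, hpresE, hitemsE, hcntE⟩ := hPE
      cases hE2 : (((p, q) :: f').foldl (nodeB g c (dist + 1)) (d, [])).2 with
      | nil =>
        cases kA' <;> cases kB' <;> simp [loopA, loopL]
      | cons a l =>
        rw [← hE2]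
        have hlen : 1 ≤ (((p, q) :: f').foldl (nodeB g c (dist + 1)) (d, [])).2.length := by
          rw [hE2]; simp
        exact IH (cntNeg (((p, q) :: f').foldl (nodeB g c (dist + 1)) (d, [])).1)
          (by omega) _ _ _ _ _ hshE (by omega) hitemsE (le_refl _)
          (by omega) (by omega)

lemma mem_gget_set (g : List (List Int)) (i : Nat) (row : List Int) (p x : Int)
    (h : x ∈ gget (g.set i row) p) : x ∈ row ∨ x ∈ gget g p := by
  unfold gget at *
  rw [List.length_set] at h
  by_cases hip : i = pyIdx g.length p
  · subst hip
    by_cases hlt : pyIdx g.length p < g.length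
    · rw [getD_set_self _ _ _ _ hlt] at h; exact Or.inl h
    · rw [List.set_eq_of_length_le (by omega)] at h; exact Or.inr h
  · rw [getD_set_ne _ _ _ hip] at h; exact Or.inr h

lemma buildG_aux (Q : Int → Prop) :
    ∀ (uv : List (Int × Int)) (g0 : List (List Int)),
      (∀ (p x : Int), x ∈ gget g0 p → Q x) → (∀ e ∈ uv, Q e.1 ∧ Q e.2) →
      ∀ (p x : Int), x ∈ gget (uv.foldl (fun g e =>
        let g1 := g.set (pyIdx g.length e.1) ((gget g e.1) ++ [e.2])
        g1.set (pyIdx g1.length e.2) ((gget g1 e.2) ++ [e.1])) g0) p → Q x := by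
  intro uv
  induction uv with
  | nil => intro g0 h0 _ p x hx; exact h0 p x hx
  | cons e uv ih =>
    intro g0 h0 he p x hx
    simp only [List.foldl_cons] at hx
    refine ih _ ?_ (fun e' h' => he e' (List.mem_cons_of_mem _ h')) p x hx
    intro p x hx
    have hQ1 : Q e.1 := (he e List.mem_cons_self).1
    have hQ2 : Q e.2 := (he e List.mem_cons_self).2
    replace hx : x ∈ gget ((g0.set (pyIdx g0.length e.1) (gget g0 e.1 ++ [e.2])).set
        (pyIdx (g0.set (pyIdx g0.length e.1) (gget g0 e.1 ++ [e.2])).length e.2)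
        (gget (g0.set (pyIdx g0.length e.1) (gget g0 e.1 ++ [e.2])) e.2 ++ [e.1])) p := hx
    rcases mem_gget_set _ _ _ _ _ hx with h | h
    · rcases List.mem_append.1 h with h | h
      · rcases mem_gget_set _ _ _ _ _ h with h2 | h2
        · rcases List.mem_append.1 h2 with h3 | h3
          · exact h0 _ _ h3
          · simp only [List.mem_singleton] at h3; rw [h3]; exact hQ2
        · exact h0 _ _ h2
      · simp only [List.mem_singleton] at h; rw [h]; exact hQ1
    · rcases mem_gget_set _ _ _ _ _ h with h2 | h2
      · rcases List.mem_append.1 h2 with h3 | h3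
        · exact h0 _ _ h3
        · simp only [List.mem_singleton] at h3; rw [h3]; exact hQ2
      · exact h0 _ _ h2

lemma gget_replicate (k : Nat) (p x : Int) (h : x ∈ gget (List.replicate k ([] : List Int)) p) :
    False := by
  unfold gget at h
  rw [List.getD_eq_getElem?_getD, List.getElem?_replicate, List.length_replicate] at h
  by_cases hk : pyIdx k p < k
  · simp [hk] at h
  · simp [hk] at h

lemma buildG_canon (n : Int) (uv : List (Int × Int))
    (he : ∀ e ∈ uv, (0 ≤ e.1 ∧ e.1 ≤ n) ∧ (0 ≤ e.2 ∧ e.2 ≤ n)) :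
    ∀ (p x : Int), x ∈ gget (buildG n uv) p → 0 ≤ x ∧ x ≤ n := by
  unfold buildG
  exact buildG_aux (fun x => 0 ≤ x ∧ x ≤ n) uv _
    (fun p x hx => absurd hx (fun hx => gget_replicate _ _ _ hx))
    (fun e h => he e h)

-- membership in buildG rows: x ∈ g[p] iff some edge joins literal x to the row class of p
lemma gget_set_iff (g : List (List Int)) (i : Nat) (row : List Int) (p : Int) :
    gget (g.set i row) p
      = if i = pyIdx g.length p ∧ i < g.length then row else gget g p := by
  unfold gget
  rw [List.length_set]
  by_cases heq : i = pyIdx g.length p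
  · by_cases hlt : i < g.length
    · rw [if_pos ⟨heq, hlt⟩, ← heq, getD_set_self _ _ _ _ hlt]
    · rw [if_neg (by tauto), List.set_eq_of_length_le (by omega)]
  · rw [if_neg (by tauto), getD_set_ne _ _ _ heq]

lemma gget_congr2 (g : List (List Int)) {a b : Int}
    (h : pyIdx g.length a = pyIdx g.length b) : gget g a = gget g b := by
  unfold gget; rw [h]

lemma mem_buildG_step (g : List (List Int)) (e : Int × Int) (p x : Int) :
    (x ∈ gget ((g.set (pyIdx g.length e.1) ((gget g e.1) ++ [e.2])).set
        (pyIdx (g.set (pyIdx g.length e.1) ((gget g e.1) ++ [e.2])).length e.2)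
        ((gget (g.set (pyIdx g.length e.1) ((gget g e.1) ++ [e.2])) e.2) ++ [e.1])) p)
    ↔ (x ∈ gget g p
        ∨ (pyIdx g.length e.1 = pyIdx g.length p ∧ pyIdx g.length e.1 < g.length ∧ x = e.2)
        ∨ (pyIdx g.length e.2 = pyIdx g.length p ∧ pyIdx g.length e.2 < g.length ∧ x = e.1)) := by
  have hlen : (g.set (pyIdx g.length e.1) ((gget g e.1) ++ [e.2])).length = g.length := by simp
  simp only [gget_set_iff, hlen]
  split_ifs with hA hB hB
  · -- class e2 = class p, class e1 = class e2
    obtain ⟨hA1, hA2⟩ := hA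
    obtain ⟨hB1, hB2⟩ := hB
    rw [gget_congr2 g (hB1.trans hA1)]
    simp only [List.mem_append, List.mem_singleton]
    constructor
    · rintro ((h | h) | h)
      · exact Or.inl h
      · exact Or.inr (Or.inl ⟨hB1.trans hA1, hB2, h⟩)
      · exact Or.inr (Or.inr ⟨hA1, hA2, h⟩)
    · rintro (h | ⟨h1, h2, h3⟩ | ⟨h1, h2, h3⟩) <;> tauto
  · -- class e2 = class p, class e1 ≠ class e2 (or e1 oob)
    obtain ⟨hA1, hA2⟩ := hA
    rw [gget_congr2 g hA1]
    simp only [List.mem_append, List.mem_singleton]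
    constructor
    · rintro (h | h)
      · exact Or.inl h
      · exact Or.inr (Or.inr ⟨hA1, hA2, h⟩)
    · rintro (h | ⟨h1, h2, h3⟩ | ⟨h1, h2, h3⟩)
      · exact Or.inl h
      · exact absurd ⟨h1.trans hA1.symm, h2⟩ hB
      · exact Or.inr h3
  · -- class e2 ≠ class p (or oob), class e1 = class p
    obtain ⟨hB1, hB2⟩ := hB
    rw [gget_congr2 g hB1]
    simp only [List.mem_append, List.mem_singleton]
    constructor
    · rintro (h | h)
      · exact Or.inl h
      · exact Or.inr (Or.inl ⟨hB1, hB2, h⟩)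
    · rintro (h | ⟨h1, h2, h3⟩ | ⟨h1, h2, h3⟩)
      · exact Or.inl h
      · exact Or.inr h3
      · exact absurd ⟨h1, h2⟩ hA
  · constructor
    · intro h; exact Or.inl h
    · rintro (h | ⟨h1, h2, h3⟩ | ⟨h1, h2, h3⟩)
      · exact h
      · exact absurd ⟨h1, h2⟩ hB
      · exact absurd ⟨h1, h2⟩ hA

lemma mem_buildG (n : Int) (uv : List (Int × Int)) (p x : Int) :
    x ∈ gget (buildG n uv) p
      ↔ ∃ e ∈ uv,
          (pyIdx (n + 1).toNat e.1 = pyIdx (n + 1).toNat p ∧ pyIdx (n + 1).toNat e.1 < (n + 1).toNat ∧ x = e.2)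
          ∨ (pyIdx (n + 1).toNat e.2 = pyIdx (n + 1).toNat p ∧ pyIdx (n + 1).toNat e.2 < (n + 1).toNat ∧ x = e.1) := by
  have core : ∀ (l : List (Int × Int)) (g0 : List (List Int)), g0.length = (n + 1).toNat →
      (x ∈ gget (l.foldl (fun g e =>
          let g1 := g.set (pyIdx g.length e.1) ((gget g e.1) ++ [e.2])
          g1.set (pyIdx g1.length e.2) ((gget g1 e.2) ++ [e.1])) g0) p
        ↔ x ∈ gget g0 p ∨ ∃ e ∈ l,
          (pyIdx (n + 1).toNat e.1 = pyIdx (n + 1).toNat p ∧ pyIdx (n + 1).toNat e.1 < (n + 1).toNat ∧ x = e.2)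
          ∨ (pyIdx (n + 1).toNat e.2 = pyIdx (n + 1).toNat p ∧ pyIdx (n + 1).toNat e.2 < (n + 1).toNat ∧ x = e.1)) := by
    intro l
    induction l with
    | nil => intro g0 _; simp
    | cons e l ih =>
      intro g0 hg0
      simp only [List.foldl_cons]
      have hlen : ((g0.set (pyIdx g0.length e.1) ((gget g0 e.1) ++ [e.2])).set
          (pyIdx (g0.set (pyIdx g0.length e.1) ((gget g0 e.1) ++ [e.2])).length e.2)
          ((gget (g0.set (pyIdx g0.length e.1) ((gget g0 e.1) ++ [e.2])) e.2) ++ [e.1])).length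
          = (n + 1).toNat := by simp [hg0]
      rw [ih _ hlen, mem_buildG_step, hg0]
      constructor
      · rintro ((h | h | h) | ⟨e', he', h⟩)
        · exact Or.inl h
        · exact Or.inr ⟨e, List.mem_cons_self, Or.inl h⟩
        · exact Or.inr ⟨e, List.mem_cons_self, Or.inr h⟩
        · exact Or.inr ⟨e', List.mem_cons_of_mem _ he', h⟩
      · rintro (h | ⟨e', he', h⟩)
        · exact Or.inl (Or.inl h)
        · rcases List.mem_cons.1 he' with rfl | he''
          · exact Or.inl (Or.inr h)
          · exact Or.inr ⟨e', he'', h⟩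
  unfold buildG
  rw [core uv _ (by simp)]
  simp only [or_iff_right_iff_imp]
  intro h
  exact absurd h (fun h => gget_replicate _ _ _ h)


-- ===== B-side: characterizing one push level as one Jacobi pull sweep =====

-- canonical vertex values (what Pre_ guarantees for all endpoints)
def canonV (n x : Int) : Prop := 0 ≤ x ∧ x ≤ n

lemma pyIdx_canon {N : Nat} {n x : Int} (hN : (N : Int) = n + 1) (hx : canonV n x) :
    pyIdx N x = x.toNat ∧ pyIdx N x < N := by
  obtain ⟨hx0, hx1⟩ := hx
  unfold pyIdx; constructor
  · rw [if_neg (by omega)]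
  · split <;> omega

lemma pyIdx_canon_inj {N : Nat} {n x y : Int} (hN : (N : Int) = n + 1)
    (hx : canonV n x) (hy : canonV n y) (h : pyIdx N x = pyIdx N y) : x = y := by
  obtain ⟨hx1, -⟩ := pyIdx_canon hN hx
  obtain ⟨hy1, -⟩ := pyIdx_canon hN hy
  obtain ⟨hx0, -⟩ := hx
  obtain ⟨hy0, -⟩ := hy
  rw [hx1, hy1] at h
  omega

lemma dget_dset_self_c {N : Nat} {n : Int} {d : List (List Int)} (hN : (N : Int) = n + 1)
    (hsh : shapeG N d) {r s : Int} (hr : canonV n r) (hs : canonV n s) (v : Int) :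
    dget (dset d r s v) r s = v :=
  dget_dset_self hsh (pyIdx_canon hN hr).2 (pyIdx_canon hN hs).2

lemma dget_dset_ne_c {N : Nat} {n : Int} {d : List (List Int)} (hN : (N : Int) = n + 1)
    (hsh : shapeG N d) {r s p q : Int} (hr : canonV n r) (hs : canonV n s)
    (hp : canonV n p) (hq : canonV n q) (v : Int) (hne : ¬(p = r ∧ q = s)) :
    dget (dset d r s v) p q = dget d p q := by
  refine dget_dset_ne hsh ?_
  rintro ⟨h1, h2⟩
  exact hne ⟨pyIdx_canon_inj hN hp hr h1.symm, pyIdx_canon_inj hN hq hs h2.symm⟩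

-- generic characterization of a left fold whose step writes value w into fresh (-1) cells
-- selected by a per-element predicate W, appending each written cell to the out-list
lemma foldChar {A : Type} (N : Nat) (n w : Int) (hN : (N : Int) = n + 1) (hw : w ≠ -1)
    (T : (List (List Int) × List (Int × Int)) → A → (List (List Int) × List (Int × Int)))
    (W : A → Int → Int → Prop) [∀ a (R S : Int), Decidable (W a R S)] (L : List A)
    (hT : ∀ st a, a ∈ L → shapeG N st.1 →
      shapeG N (T st a).1 ∧
      (∀ R S : Int, canonV n R → canonV n S →
        dget (T st a).1 R S = if W a R S ∧ dget st.1 R S = -1 then w else dget st.1 R S) ∧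
      (∀ RS : Int × Int, RS ∈ (T st a).2 ↔ RS ∈ st.2 ∨
        (canonV n RS.1 ∧ canonV n RS.2 ∧ W a RS.1 RS.2 ∧ dget st.1 RS.1 RS.2 = -1))) :
    ∀ st, shapeG N st.1 →
      shapeG N (L.foldl T st).1 ∧
      (∀ R S : Int, canonV n R → canonV n S →
        dget (L.foldl T st).1 R S =
          if (∃ a ∈ L, W a R S) ∧ dget st.1 R S = -1 then w else dget st.1 R S) ∧
      (∀ RS : Int × Int, RS ∈ (L.foldl T st).2 ↔ RS ∈ st.2 ∨
        (canonV n RS.1 ∧ canonV n RS.2 ∧ (∃ a ∈ L, W a RS.1 RS.2) ∧ dget st.1 RS.1 RS.2 = -1)) := by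
  induction L with
  | nil =>
    intro st hsh
    refine ⟨by simpa using hsh, fun R S _ _ => ?_, fun RS => ?_⟩
    · simp only [List.foldl_nil]
      rw [if_neg (by rintro ⟨⟨a, ha, -⟩, -⟩; exact absurd ha (List.not_mem_nil))]
    · simp
  | cons a0 L' ih =>
    intro st hsh
    obtain ⟨hsh', hpt, hmem⟩ := hT st a0 List.mem_cons_self hsh
    obtain ⟨ihsh, ihpt, ihmem⟩ := ih
      (fun st a ha h => hT st a (List.mem_cons_of_mem _ ha) h) (T st a0) hsh'
    simp only [List.foldl_cons]
    refine ⟨ihsh, ?_, ?_⟩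
    · intro R S hR hS
      rw [ihpt R S hR hS, hpt R S hR hS]
      by_cases h0 : W a0 R S ∧ dget st.1 R S = -1
      · rw [if_pos h0, if_neg (by rintro ⟨-, hcon⟩; exact hw hcon),
          if_pos ⟨⟨a0, List.mem_cons_self, h0.1⟩, h0.2⟩]
      · rw [if_neg h0]
        by_cases h1 : (∃ a ∈ L', W a R S) ∧ dget st.1 R S = -1
        · rw [if_pos h1, if_pos ⟨⟨h1.1.choose, List.mem_cons_of_mem _ h1.1.choose_spec.1,
            h1.1.choose_spec.2⟩, h1.2⟩]
        · rw [if_neg h1]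
          rw [if_neg ?_]
          rintro ⟨⟨a, ha, hWa⟩, hm1⟩
          rcases List.mem_cons.1 ha with rfl | ha'
          · exact h0 ⟨hWa, hm1⟩
          · exact h1 ⟨⟨a, ha', hWa⟩, hm1⟩
    · intro RS
      rw [ihmem RS, hmem RS]
      constructor
      · rintro ((h | ⟨hc1, hc2, hW, hm⟩) | ⟨hc1, hc2, ⟨a, ha, hWa⟩, hm⟩)
        · exact Or.inl h
        · exact Or.inr ⟨hc1, hc2, ⟨a0, List.mem_cons_self, hW⟩, hm⟩
        · rw [hpt RS.1 RS.2 hc1 hc2] at hm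
          by_cases h0 : W a0 RS.1 RS.2 ∧ dget st.1 RS.1 RS.2 = -1
          · rw [if_pos h0] at hm; exact absurd hm hw
          · rw [if_neg h0] at hm
            exact Or.inr ⟨hc1, hc2, ⟨a, List.mem_cons_of_mem _ ha, hWa⟩, hm⟩
      · rintro (h | ⟨hc1, hc2, ⟨a, ha, hWa⟩, hm⟩)
        · exact Or.inl (Or.inl h)
        · rcases List.mem_cons.1 ha with rfl | ha'
          · exact Or.inl (Or.inr ⟨hc1, hc2, hWa, hm⟩)
          · by_cases h0 : W a0 RS.1 RS.2 ∧ dget st.1 RS.1 RS.2 = -1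
            · exact Or.inl (Or.inr ⟨hc1, hc2, h0.1, h0.2⟩)
            · refine Or.inr ⟨hc1, hc2, ⟨a, ha', hWa⟩, ?_⟩
              rw [hpt RS.1 RS.2 hc1 hc2, if_neg h0]
              exact hm

-- single relaxation step of A's push, in foldChar form
lemma innerStepChar (N : Nat) (n w : Int) (hN : (N : Int) = n + 1) (hw : w ≠ -1)
    (c : List Int) (r : Int) (hr : canonV n r) (s0 : Int) (hs0 : canonV n s0)
    (st : List (List Int) × List (Int × Int)) (hsh : shapeG N st.1) :
    shapeG N ((if (!(cget c r == cget c s0)) && (dget st.1 r s0 == -1)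
        then (dset st.1 r s0 w, st.2 ++ [(r, s0)]) else st)).1 ∧
    (∀ R S : Int, canonV n R → canonV n S →
      dget ((if (!(cget c r == cget c s0)) && (dget st.1 r s0 == -1)
        then (dset st.1 r s0 w, st.2 ++ [(r, s0)]) else st)).1 R S =
        if (R = r ∧ S = s0 ∧ cget c R ≠ cget c S) ∧ dget st.1 R S = -1 then w
        else dget st.1 R S) ∧
    (∀ RS : Int × Int, RS ∈ ((if (!(cget c r == cget c s0)) && (dget st.1 r s0 == -1)
        then (dset st.1 r s0 w, st.2 ++ [(r, s0)]) else st)).2 ↔ RS ∈ st.2 ∨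
      (canonV n RS.1 ∧ canonV n RS.2 ∧ (RS.1 = r ∧ RS.2 = s0 ∧ cget c RS.1 ≠ cget c RS.2)
        ∧ dget st.1 RS.1 RS.2 = -1)) := by
  by_cases hb : ((!(cget c r == cget c s0)) && (dget st.1 r s0 == -1)) = true
  · have hb' : cget c r ≠ cget c s0 ∧ dget st.1 r s0 = -1 := by
      simpa using hb
    rw [if_pos hb]
    refine ⟨shape_dset hsh, ?_, ?_⟩
    · intro R S hR hS
      by_cases heq : R = r ∧ S = s0
      · obtain ⟨rfl, rfl⟩ := heq
        rw [dget_dset_self_c hN hsh hr hs0, if_pos ⟨⟨rfl, rfl, hb'.1⟩, hb'.2⟩]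
      · rw [dget_dset_ne_c hN hsh hr hs0 hR hS _ heq]
        rw [if_neg (by rintro ⟨⟨h1, h2, -⟩, -⟩; exact heq ⟨h1, h2⟩)]
    · intro RS
      simp only [List.mem_append, List.mem_singleton]
      constructor
      · rintro (h | rfl)
        · exact Or.inl h
        · exact Or.inr ⟨hr, hs0, ⟨rfl, rfl, hb'.1⟩, hb'.2⟩
      · rintro (h | ⟨-, -, ⟨h1, h2, -⟩, -⟩)
        · exact Or.inl h
        · right
          rw [Prod.ext_iff]
          exact ⟨h1, h2⟩
  · rw [if_neg hb]
    refine ⟨hsh, ?_, ?_⟩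
    · intro R S hR hS
      rw [if_neg ?_]
      rintro ⟨⟨rfl, rfl, hcn⟩, hm⟩
      exact hb (by simp [hcn, hm])
    · intro RS
      constructor
      · exact Or.inl
      · rintro (h | ⟨-, -, ⟨h1, h2, hcn⟩, hm⟩)
        · exact h
        · rw [h1, h2] at hcn hm
          exact absurd (by simp [hcn, hm]) hb

-- characterization of one full push level (f.foldl (nodeB g c w)) by the pull condition
lemma levelChar (N : Nat) (n w : Int) (hN : (N : Int) = n + 1) (hw : w ≠ -1)
    (g : List (List Int)) (c : List Int)
    (Gb : ∀ (p x : Int), x ∈ gget g p → canonV n x) (f : List (Int × Int)) :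
    ∀ st, shapeG N st.1 →
      shapeG N (f.foldl (nodeB g c w) st).1 ∧
      (∀ R S : Int, canonV n R → canonV n S →
        dget (f.foldl (nodeB g c w) st).1 R S =
          if (∃ pq ∈ f, R ∈ gget g pq.1 ∧ S ∈ gget g pq.2 ∧ cget c R ≠ cget c S)
              ∧ dget st.1 R S = -1 then w
          else dget st.1 R S) ∧
      (∀ RS : Int × Int, RS ∈ (f.foldl (nodeB g c w) st).2 ↔ RS ∈ st.2 ∨
        (canonV n RS.1 ∧ canonV n RS.2 ∧
          (∃ pq ∈ f, RS.1 ∈ gget g pq.1 ∧ RS.2 ∈ gget g pq.2 ∧ cget c RS.1 ≠ cget c RS.2)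
          ∧ dget st.1 RS.1 RS.2 = -1)) := by
  refine foldChar N n w hN hw (nodeB g c w)
    (fun pq R S => R ∈ gget g pq.1 ∧ S ∈ gget g pq.2 ∧ cget c R ≠ cget c S) f ?_
  intro st pq _ hsh
  -- one popped node = fold over r ∈ g[pq.1] of inner folds; characterize it with foldChar
  have hmid := foldChar N n w hN hw
    (fun st r => (gget g pq.2).foldl (fun st s =>
      if (!(cget c r == cget c s)) && (dget st.1 r s == -1)
      then (dset st.1 r s w, st.2 ++ [(r, s)]) else st) st)
    (fun r R S => R = r ∧ S ∈ gget g pq.2 ∧ cget c R ≠ cget c S) (gget g pq.1) ?hmidT st hsh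
  case hmidT =>
    intro st r hrmem hsh
    have hr : canonV n r := Gb pq.1 r hrmem
    have hin := foldChar N n w hN hw
      (fun st s => if (!(cget c r == cget c s)) && (dget st.1 r s == -1)
        then (dset st.1 r s w, st.2 ++ [(r, s)]) else st)
      (fun s R S => R = r ∧ S = s ∧ cget c R ≠ cget c S) (gget g pq.2) ?hinT st hsh
    case hinT =>
      intro st s0 hs0mem hsh
      exact innerStepChar N n w hN hw c r hr s0 (Gb pq.2 s0 hs0mem) st hsh
    obtain ⟨h1, h2, h3⟩ := hin
    refine ⟨h1, ?_, ?_⟩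
    · intro R S hR hS
      rw [h2 R S hR hS]
      congr 1
      · rw [eq_iff_iff]
        constructor
        · rintro ⟨⟨s, hs, rfl, rfl, hcn⟩, hm⟩
          exact ⟨⟨rfl, hs, hcn⟩, hm⟩
        · rintro ⟨⟨rfl, hs, hcn⟩, hm⟩
          exact ⟨⟨S, hs, rfl, rfl, hcn⟩, hm⟩
    · intro RS
      rw [h3 RS]
      constructor
      · rintro (h | ⟨hc1, hc2, ⟨s, hs, rfl, rfl, hcn⟩, hm⟩)
        · exact Or.inl h
        · exact Or.inr ⟨hc1, hc2, ⟨rfl, hs, hcn⟩, hm⟩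
      · rintro (h | ⟨hc1, hc2, ⟨rfl, hs, hcn⟩, hm⟩)
        · exact Or.inl h
        · exact Or.inr ⟨hc1, hc2, ⟨RS.2, hs, rfl, rfl, hcn⟩, hm⟩
  obtain ⟨h1, h2, h3⟩ := hmid
  refine ⟨h1, ?_, ?_⟩
  · intro R S hR hS
    rw [show nodeB g c w st pq = (gget g pq.1).foldl (fun st r => (gget g pq.2).foldl (fun st s =>
        if (!(cget c r == cget c s)) && (dget st.1 r s == -1)
        then (dset st.1 r s w, st.2 ++ [(r, s)]) else st) st) st from rfl]
    rw [h2 R S hR hS]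
    congr 1
    · rw [eq_iff_iff]
      constructor
      · rintro ⟨⟨r, hrmem, rfl, hs, hcn⟩, hm⟩
        exact ⟨⟨hrmem, hs, hcn⟩, hm⟩
      · rintro ⟨⟨hrmem, hs, hcn⟩, hm⟩
        exact ⟨⟨R, hrmem, rfl, hs, hcn⟩, hm⟩
  · intro RS
    rw [show nodeB g c w st pq = (gget g pq.1).foldl (fun st r => (gget g pq.2).foldl (fun st s =>
        if (!(cget c r == cget c s)) && (dget st.1 r s == -1)
        then (dset st.1 r s w, st.2 ++ [(r, s)]) else st) st) st from rfl]
    rw [h3 RS]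
    constructor
    · rintro (h | ⟨hc1, hc2, ⟨r, hrmem, rfl, hs, hcn⟩, hm⟩)
      · exact Or.inl h
      · exact Or.inr ⟨hc1, hc2, ⟨hrmem, hs, hcn⟩, hm⟩
    · rintro (h | ⟨hc1, hc2, ⟨hrmem, hs, hcn⟩, hm⟩)
      · exact Or.inl h
      · exact Or.inr ⟨hc1, hc2, ⟨RS.1, hrmem, rfl, hs, hcn⟩, hm⟩

-- membership characterization of the scanned vertex list and of one Jacobi sweep
lemma mem_vertsL (n : Int) (g : List (List Int)) (v : Int) :
    v ∈ vertsL n g ↔ (0 ≤ v ∧ v < n + 1) ∧ gget g v ≠ [] := by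
  unfold vertsL
  rw [PySem.List.foldl_append_if_eq_filter]
  simp [List.mem_filter, PySem.List.mem_pyRange_one]

lemma mem_sweepUpd (verts : List Int) (g : List (List Int)) (c : List Int)
    (d : List (List Int)) (R S : Int) :
    (R, S) ∈ sweepUpd verts g c d ↔
      R ∈ verts ∧ S ∈ verts ∧ dget d R S = -1 ∧
      (∃ p ∈ gget g R, ∃ q ∈ gget g S, dget d p q ≠ -1) ∧ cget c R ≠ cget c S := by
  unfold sweepUpd
  have hin : ∀ (r : Int) (acc : List (Int × Int)),
      verts.foldl (fun acc s =>
        if (dget d r s == -1)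
            && ((gget g r).any (fun p => (gget g s).any (fun q => !(dget d p q == -1))))
            && (!(cget c r == cget c s))
        then acc ++ [(r, s)] else acc) acc
      = acc ++ (verts.filter (fun s =>
          (dget d r s == -1)
            && ((gget g r).any (fun p => (gget g s).any (fun q => !(dget d p q == -1))))
            && (!(cget c r == cget c s)))).map (fun s => (r, s)) := by
    intro r acc
    exact PySem.List.foldl_append_if _ _ _ _
  simp only [hin]
  rw [PySem.List.foldl_append_eq_flatMap]
  simp only [List.nil_append, List.mem_flatMap, List.mem_map, List.mem_filter]
  constructor
  · rintro ⟨r, ⟨hr, s, ⟨hs, hcond⟩, heq⟩⟩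
    obtain ⟨rfl, rfl⟩ := Prod.mk.injEq .. ▸ heq
    simp only [Bool.and_eq_true, beq_iff_eq, List.any_eq_true,
      Bool.not_eq_eq_eq_not, Bool.not_true, beq_eq_false_iff_ne] at hcond
    obtain ⟨⟨h1, h2⟩, h3⟩ := hcond
    exact ⟨hr, hs, h1, by simpa using h2, h3⟩
  · rintro ⟨hR, hS, h1, h2, h3⟩
    refine ⟨R, hR, S, ⟨hS, ?_⟩, rfl⟩
    simp only [Bool.and_eq_true, beq_iff_eq, List.any_eq_true, Bool.not_eq_eq_eq_not,
      Bool.not_true, beq_eq_false_iff_ne]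
    exact ⟨⟨h1, by simpa using h2⟩, h3⟩

-- writing a sweep's updates, pointwise
lemma writeUpd_char (N : Nat) (n lvl : Int) (hN : (N : Int) = n + 1) :
    ∀ (u : List (Int × Int)) (d : List (List Int)), shapeG N d →
      (∀ RS ∈ u, canonV n RS.1 ∧ canonV n RS.2) →
      shapeG N (writeUpd d lvl u) ∧
      (∀ R S : Int, canonV n R → canonV n S →
        dget (writeUpd d lvl u) R S = if (R, S) ∈ u then lvl else dget d R S) := by
  intro u
  induction u with
  | nil =>
    intro d hsh _
    exact ⟨hsh, fun R S _ _ => by simp [writeUpd]⟩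
  | cons a u' ih =>
    intro d hsh hcanon
    have ha := hcanon a List.mem_cons_self
    have hstep : writeUpd d lvl (a :: u') = writeUpd (dset d a.1 a.2 lvl) lvl u' := rfl
    obtain ⟨ihsh, ihpt⟩ := ih (dset d a.1 a.2 lvl) (shape_dset hsh)
      (fun RS h => hcanon RS (List.mem_cons_of_mem _ h))
    rw [hstep]
    refine ⟨ihsh, ?_⟩
    intro R S hR hS
    rw [ihpt R S hR hS]
    by_cases hmem : (R, S) ∈ u'
    · rw [if_pos hmem, if_pos (List.mem_cons_of_mem _ hmem)]
    · rw [if_neg hmem]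
      by_cases heq : R = a.1 ∧ S = a.2
      · obtain ⟨rfl, rfl⟩ := heq
        rw [dget_dset_self_c hN hsh ha.1 ha.2, if_pos (by simp)]
      · rw [dget_dset_ne_c hN hsh ha.1 ha.2 hR hS _ (by tauto)]
        rw [if_neg ?_]
        rintro h
        rcases List.mem_cons.1 h with h | h
        · exact heq ⟨congrArg Prod.fst h, congrArg Prod.snd h⟩
        · exact hmem h

-- two N×N grids with the same canonical cells are equal
lemma dget_nat (N : Nat) {d : List (List Int)} (hsh : shapeG N d) (i j : Nat)
    (hi : i < N) (hj : j < N) (hi' : i < d.length)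
    (hj' : j < (d[i]'hi').length) :
    dget d (i : Int) (j : Int) = (d[i]'hi')[j]'hj' := by
  unfold dget
  have hpi : pyIdx N (i : Int) = i := by unfold pyIdx; split <;> omega
  have hpjN : pyIdx N (j : Int) = j := by unfold pyIdx; split <;> omega
  rw [hsh.1, hpi]
  have hrow : d.getD i [] = d[i]'hi' := by
    rw [List.getD_eq_getElem?_getD, List.getElem?_eq_getElem hi']; rfl
  have hlen : (d[i]'hi').length = N := hsh.2 _ (List.getElem_mem hi')
  rw [hrow, hlen, hpjN, List.getD_eq_getElem?_getD, List.getElem?_eq_getElem hj']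
  rfl

lemma grid_ext (N : Nat) (n : Int) (hN : (N : Int) = n + 1) (d1 d2 : List (List Int))
    (h1 : shapeG N d1) (h2 : shapeG N d2)
    (hpt : ∀ R S : Int, canonV n R → canonV n S → dget d1 R S = dget d2 R S) : d1 = d2 := by
  apply List.ext_getElem (by rw [h1.1, h2.1])
  intro i hi1 hi2
  apply List.ext_getElem
  · rw [h1.2 _ (List.getElem_mem hi1), h2.2 _ (List.getElem_mem hi2)]
  intro j hj1 hj2
  have hiN : i < N := by rw [← h1.1]; exact hi1
  have hjN : j < N := by
    rw [h1.2 _ (List.getElem_mem hi1)] at hj1; exact hj1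
  rw [← dget_nat N h1 i j hiN hjN hi1 hj1, ← dget_nat N h2 i j hiN hjN hi2 hj2]
  exact hpt i j ⟨by omega, by omega⟩ ⟨by omega, by omega⟩

-- row symmetry of the undirected adjacency structure, for canonical vertices
lemma gsym_buildG (n : Int) (uv : List (Int × Int))
    (he : ∀ e ∈ uv, (0 ≤ e.1 ∧ e.1 ≤ n) ∧ (0 ≤ e.2 ∧ e.2 ≤ n)) :
    ∀ p x : Int, canonV n p → x ∈ gget (buildG n uv) p → p ∈ gget (buildG n uv) x := by
  have hN : (((n + 1).toNat : Nat) : Int) = n + 1 ∨ n + 1 ≤ 0 := by omega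
  intro p x hp hx
  rw [mem_buildG] at hx ⊢
  obtain ⟨e, hemem, hcase⟩ := hx
  have he1 : canonV n e.1 := (he e hemem).1
  have he2 : canonV n e.2 := (he e hemem).2
  have hNeq : (((n + 1).toNat : Nat) : Int) = n + 1 := by
    obtain ⟨h1, -⟩ := hp; omega
  rcases hcase with ⟨hcls, hlt, rfl⟩ | ⟨hcls, hlt, rfl⟩
  · have : e.1 = p := pyIdx_canon_inj hNeq he1 hp hcls
    refine ⟨e, hemem, Or.inr ⟨rfl, (pyIdx_canon hNeq he2).2, this.symm⟩⟩
  · have : e.2 = p := pyIdx_canon_inj hNeq he2 hp hcls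
    refine ⟨e, hemem, Or.inl ⟨rfl, (pyIdx_canon hNeq he1).2, this.symm⟩⟩

-- the invariant tying A's frontier to B's grid at the start of each level:
-- frontier = exactly the cells at distance dist, all values ≤ dist, and every
-- colour-admissible undiscovered cell's discovered predecessors sit on the frontier
def JInv (N : Nat) (n : Int) (g : List (List Int)) (c : List Int) (dist : Int)
    (d : List (List Int)) (f : List (Int × Int)) : Prop :=
  shapeG N d ∧
  (∀ pq ∈ f, canonV n pq.1 ∧ canonV n pq.2) ∧
  (∀ pq ∈ f, dget d pq.1 pq.2 = dist) ∧
  (∀ R S : Int, canonV n R → canonV n S → dget d R S = dist → (R, S) ∈ f) ∧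
  (∀ R S : Int, canonV n R → canonV n S → dget d R S ≤ dist) ∧
  (∀ R S : Int, canonV n R → canonV n S → dget d R S = -1 → cget c R ≠ cget c S →
    ∀ p ∈ gget g R, ∀ q ∈ gget g S, dget d p q = -1 ∨ dget d p q = dist)

-- one push level = one pull sweep, and the invariant advances
lemma JSTEP (N : Nat) (n : Int) (g : List (List Int)) (c : List Int) (verts : List Int)
    (hN : (N : Int) = n + 1)
    (Gb : ∀ (p x : Int), x ∈ gget g p → canonV n x)
    (Gsym : ∀ p x : Int, canonV n p → x ∈ gget g p → p ∈ gget g x)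
    (hverts : ∀ v : Int, v ∈ verts ↔ (0 ≤ v ∧ v < n + 1) ∧ gget g v ≠ [])
    (dist : Int) (hdist : 0 ≤ dist) (d : List (List Int)) (f : List (Int × Int))
    (hJ : JInv N n g c dist d f) :
    (f.foldl (nodeB g c (dist + 1)) (d, ([] : List (Int × Int)))).1
        = writeUpd d (dist + 1) (sweepUpd verts g c d) ∧
    ((f.foldl (nodeB g c (dist + 1)) (d, ([] : List (Int × Int)))).2 = []
        ↔ sweepUpd verts g c d = []) ∧
    JInv N n g c (dist + 1) (f.foldl (nodeB g c (dist + 1)) (d, ([] : List (Int × Int)))).1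
      (f.foldl (nodeB g c (dist + 1)) (d, ([] : List (Int × Int)))).2 := by
  obtain ⟨hsh, hfc, hfv, hrev, hle, hcl⟩ := hJ
  have hw : (dist + 1 : Int) ≠ -1 := by omega
  obtain ⟨Lsh, Lpt0, Lmem0⟩ := levelChar N n (dist + 1) hN hw g c Gb f
    (d, ([] : List (Int × Int))) hsh
  have Lpt : ∀ R S : Int, canonV n R → canonV n S →
      dget (f.foldl (nodeB g c (dist + 1)) (d, ([] : List (Int × Int)))).1 R S =
        if (∃ pq ∈ f, R ∈ gget g pq.1 ∧ S ∈ gget g pq.2 ∧ cget c R ≠ cget c S)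
            ∧ dget d R S = -1 then dist + 1
        else dget d R S := Lpt0
  have Lmem : ∀ RS : Int × Int,
      RS ∈ (f.foldl (nodeB g c (dist + 1)) (d, ([] : List (Int × Int)))).2 ↔
        RS ∈ ([] : List (Int × Int)) ∨
        (canonV n RS.1 ∧ canonV n RS.2 ∧
          (∃ pq ∈ f, RS.1 ∈ gget g pq.1 ∧ RS.2 ∈ gget g pq.2 ∧ cget c RS.1 ≠ cget c RS.2)
          ∧ dget d RS.1 RS.2 = -1) := Lmem0
  clear Lpt0 Lmem0
  have condEq : ∀ R S : Int, canonV n R → canonV n S →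
      (((∃ pq ∈ f, R ∈ gget g pq.1 ∧ S ∈ gget g pq.2 ∧ cget c R ≠ cget c S)
          ∧ dget d R S = -1) ↔ (R, S) ∈ sweepUpd verts g c d) := by
    intro R S hR hS
    rw [mem_sweepUpd]
    constructor
    · rintro ⟨⟨pq, hpq, hRm, hSm, hcn⟩, hm⟩
      have hpR : pq.1 ∈ gget g R := Gsym pq.1 R (hfc pq hpq).1 hRm
      have hqS : pq.2 ∈ gget g S := Gsym pq.2 S (hfc pq hpq).2 hSm
      refine ⟨(hverts R).2 ⟨⟨hR.1, by have := hR.2; omega⟩, List.ne_nil_of_mem hpR⟩,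
        (hverts S).2 ⟨⟨hS.1, by have := hS.2; omega⟩, List.ne_nil_of_mem hqS⟩, hm, ?_, hcn⟩
      refine ⟨pq.1, hpR, pq.2, hqS, ?_⟩
      rw [hfv pq hpq]
      omega
    · rintro ⟨hRr, hSr, hm, ⟨p, hp, q, hq, hne⟩, hcn⟩
      have hpc : canonV n p := Gb R p hp
      have hqc : canonV n q := Gb S q hq
      have hval : dget d p q = dist := by
        rcases hcl R S hR hS hm hcn p hp q hq with h | h
        · exact absurd h hne
        · exact h
      exact ⟨⟨(p, q), hrev p q hpc hqc hval, Gsym R p hR hp, Gsym S q hS hq, hcn⟩, hm⟩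
  have hucanon : ∀ RS ∈ sweepUpd verts g c d, canonV n RS.1 ∧ canonV n RS.2 := by
    rintro ⟨R, S⟩ h
    rw [mem_sweepUpd] at h
    obtain ⟨h1, h2, -⟩ := h
    rw [hverts R] at h1
    rw [hverts S] at h2
    exact ⟨⟨h1.1.1, by have := h1.1.2; omega⟩, ⟨h2.1.1, by have := h2.1.2; omega⟩⟩
  obtain ⟨Wsh, Wpt⟩ := writeUpd_char N n (dist + 1) hN (sweepUpd verts g c d) d hsh hucanon
  have hgrid : (f.foldl (nodeB g c (dist + 1)) (d, ([] : List (Int × Int)))).1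
      = writeUpd d (dist + 1) (sweepUpd verts g c d) := by
    refine grid_ext N n hN _ _ Lsh Wsh ?_
    intro R S hR hS
    rw [Lpt R S hR hS, Wpt R S hR hS]
    by_cases hc : (R, S) ∈ sweepUpd verts g c d
    · rw [if_pos ((condEq R S hR hS).2 hc), if_pos hc]
    · rw [if_neg (fun hh => hc ((condEq R S hR hS).1 hh)), if_neg hc]
  have hmemF : ∀ RS : Int × Int,
      RS ∈ (f.foldl (nodeB g c (dist + 1)) (d, ([] : List (Int × Int)))).2
        ↔ RS ∈ sweepUpd verts g c d := by
    rintro ⟨R, S⟩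
    rw [Lmem (R, S)]
    constructor
    · rintro (h | ⟨hc1, hc2, hW, hm⟩)
      · exact absurd h (List.not_mem_nil)
      · exact (condEq R S hc1 hc2).1 ⟨hW, hm⟩
    · intro h
      have hc := hucanon (R, S) h
      obtain ⟨hW, hm⟩ := (condEq R S hc.1 hc.2).2 h
      exact Or.inr ⟨hc.1, hc.2, hW, hm⟩
  refine ⟨hgrid, ?_, ?_⟩
  · rw [List.eq_nil_iff_forall_not_mem, List.eq_nil_iff_forall_not_mem]
    constructor
    · intro h RS hRS
      exact h RS ((hmemF RS).2 hRS)
    · intro h RS hRS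
      exact h RS ((hmemF RS).1 hRS)
  · refine ⟨Lsh, ?_, ?_, ?_, ?_, ?_⟩
    · intro pq hpq
      exact (hucanon pq ((hmemF pq).1 hpq))
    · rintro ⟨R, S⟩ hpq
      have hc := hucanon (R, S) ((hmemF (R, S)).1 hpq)
      obtain ⟨hW, hm⟩ := (condEq R S hc.1 hc.2).2 ((hmemF (R, S)).1 hpq)
      rw [Lpt R S hc.1 hc.2, if_pos ⟨hW, hm⟩]
    · intro R S hR hS hval
      rw [Lpt R S hR hS] at hval
      by_cases hc : (∃ pq ∈ f, R ∈ gget g pq.1 ∧ S ∈ gget g pq.2 ∧ cget c R ≠ cget c S)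
          ∧ dget d R S = -1
      · exact (hmemF (R, S)).2 ((condEq R S hR hS).1 hc)
      · rw [if_neg hc] at hval
        have := hle R S hR hS
        omega
    · intro R S hR hS
      rw [Lpt R S hR hS]
      split_ifs with hc
      · omega
      · have := hle R S hR hS
        omega
    · intro R S hR hS hval hcn p hp q hq
      have hpc : canonV n p := Gb R p hp
      have hqc : canonV n q := Gb S q hq
      rw [Lpt R S hR hS] at hval
      have hnotW : ¬((∃ pq ∈ f, R ∈ gget g pq.1 ∧ S ∈ gget g pq.2 ∧ cget c R ≠ cget c S)
          ∧ dget d R S = -1) := by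
        intro hcc
        rw [if_pos hcc] at hval
        omega
      rw [if_neg hnotW] at hval
      rw [Lpt p q hpc hqc]
      split_ifs with hc
      · right; rfl
      · rcases hcl R S hR hS hval hcn p hp q hq with h | h
        · exact Or.inl h
        · exfalso
          refine hnotW ⟨⟨(p, q), hrev p q hpc hqc h, Gsym R p hR hp, Gsym S q hS hq, hcn⟩, hval⟩

-- loopL/loopJ unfolding helpers
lemma loopL_nil (g : List (List Int)) (c : List Int) (k : Nat) (d : List (List Int)) (dist : Int) :
    loopL g c k [] d dist = d := by
  cases k <;> rfl

lemma loopJ_cons (verts : List Int) (g : List (List Int)) (c : List Int) (lvl : Int)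
    (rest : List Int) (d : List (List Int)) :
    loopJ verts g c (lvl :: rest) d
      = if (sweepUpd verts g c d).isEmpty then d
        else loopJ verts g c rest (writeUpd d lvl (sweepUpd verts g c d)) := rfl

-- an empty frontier means the next sweep finds nothing
lemma sweep_empty (N : Nat) (n : Int) (g : List (List Int)) (c : List Int)
    (verts : List Int)
    (hN : (N : Int) = n + 1) (Gb : ∀ (p x : Int), x ∈ gget g p → canonV n x)
    (hverts : ∀ v : Int, v ∈ verts ↔ (0 ≤ v ∧ v < n + 1) ∧ gget g v ≠ [])
    (dist : Int) (d : List (List Int)) (hJ : JInv N n g c dist d []) :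
    sweepUpd verts g c d = [] := by
  obtain ⟨-, -, -, hrev, hle, hcl⟩ := hJ
  rw [List.eq_nil_iff_forall_not_mem]
  rintro ⟨R, S⟩ hmem
  rw [mem_sweepUpd] at hmem
  obtain ⟨hRr, hSr, hm, ⟨p, hp, q, hq, hne⟩, hcn⟩ := hmem
  rw [hverts R] at hRr
  rw [hverts S] at hSr
  have hR : canonV n R := ⟨hRr.1.1, by have := hRr.1.2; omega⟩
  have hS : canonV n S := ⟨hSr.1.1, by have := hSr.1.2; omega⟩
  rcases hcl R S hR hS hm hcn p hp q hq with h | h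
  · exact hne h
  · exact absurd (hrev p q (Gb R p hp) (Gb S q hq) h) (List.not_mem_nil)

-- level-synchronized push loop = Jacobi pull loop, by strong induction on undiscovered cells
lemma main2 (N : Nat) (n : Int) (g : List (List Int)) (c : List Int) (verts : List Int)
    (hN : (N : Int) = n + 1)
    (Gb : ∀ (p x : Int), x ∈ gget g p → canonV n x)
    (Gsym : ∀ p x : Int, canonV n p → x ∈ gget g p → p ∈ gget g x)
    (hverts : ∀ v : Int, v ∈ verts ↔ (0 ≤ v ∧ v < n + 1) ∧ gget g v ≠ []) :
    ∀ (cb : Nat), ∀ (kB L : Nat) (f : List (Int × Int)) (d : List (List Int)) (dist : Int),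
      0 ≤ dist → JInv N n g c dist d f → cntNeg d ≤ cb → cb + 1 ≤ L → cb + 2 ≤ kB →
      loopL g c kB f d dist
        = loopJ verts g c (PySem.List.pyRange (dist + 1) (dist + 1 + (L : Int)) 1) d := by
  intro cb
  induction cb using Nat.strong_induction_on with
  | _ cb IH =>
    intro kB L f d dist hdist hJ hcnt hL hkB
    have hlist : PySem.List.pyRange (dist + 1) (dist + 1 + (L : Int)) 1
        = (dist + 1) :: PySem.List.pyRange (dist + 1 + 1) (dist + 1 + (L : Int)) 1 :=
      PySem.List.pyRange_one_cons (by omega)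
    cases f with
    | nil =>
      have hu := sweep_empty N n g c verts hN Gb hverts dist d hJ
      rw [loopL_nil, hlist, loopJ_cons, hu]
      simp
    | cons pq f' =>
      obtain ⟨kB', rfl⟩ : ∃ kB', kB = kB' + 1 := ⟨kB - 1, by omega⟩
      have hstep : loopL g c (kB' + 1) (pq :: f') d dist
          = loopL g c kB' ((pq :: f').foldl (nodeB g c (dist + 1)) (d, [])).2
              ((pq :: f').foldl (nodeB g c (dist + 1)) (d, [])).1 (dist + 1) := rfl
      obtain ⟨hgrid, hiff, hJ'⟩ := JSTEP N n g c verts hN Gb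
        (fun p x hp hx => Gsym p x hp hx) hverts dist hdist d (pq :: f') hJ
      rw [hstep, hlist, loopJ_cons]
      by_cases hu : sweepUpd verts g c d = []
      · rw [if_pos (by simp [hu])]
        rw [hiff.2 hu, loopL_nil, hgrid, hu]
        rfl
      · rw [if_neg (by simpa using hu)]
        -- strict decrease of undiscovered cells via the PInv counting machinery
        have hP0 : PInv N d (cntNeg d) dist (d, []) :=
          ⟨hJ.1, fun _ _ _ => rfl, by simp, by simp⟩
        have hGb' : ∀ (p x : Int), x ∈ gget g p → pyIdx N x < N :=
          fun p x hx => (pyIdx_canon hN (Gb p x hx)).2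
        have hPE := levelP N d (cntNeg d) dist hdist g c hGb' (pq :: f') (d, []) hP0
          hJ.2.2.1
        have hne2 : ((pq :: f').foldl (nodeB g c (dist + 1)) (d, [])).2 ≠ [] :=
          fun h => hu (hiff.1 h)
        have hlen : 1 ≤ ((pq :: f').foldl (nodeB g c (dist + 1)) (d, [])).2.length := by
          cases hx : ((pq :: f').foldl (nodeB g c (dist + 1)) (d, [])).2 with
          | nil => exact absurd hx hne2
          | cons a l => simp
        have hcnt' : cntNeg ((pq :: f').foldl (nodeB g c (dist + 1)) (d, [])).1 + 1
            ≤ cntNeg d := by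
          have := hPE.2.2.2
          omega
        have harith : dist + 1 + (L : Int) = (dist + 1) + 1 + ((L - 1 : Nat) : Int) := by
          push_cast [Nat.cast_sub (by omega : 1 ≤ L)]
          ring
        rw [harith, ← hgrid]
        exact IH (cb - 1) (by omega) kB' (L - 1) _ _ (dist + 1) (by omega) hJ'
          (by omega) (by omega) (by omega)

-- base grid facts
lemma dget_replicate (N : Nat) (R S : Int) :
    dget (List.replicate N (List.replicate N (-1 : Int))) R S = -1 := by
  unfold dget
  rw [List.length_replicate]
  by_cases h : pyIdx N R < N
  · have hrow : (List.replicate N (List.replicate N (-1 : Int))).getD (pyIdx N R) []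
        = List.replicate N (-1 : Int) := by
      rw [List.getD_eq_getElem?_getD, List.getElem?_replicate, if_pos h]
      rfl
    rw [hrow, List.length_replicate]
    by_cases h2 : pyIdx N S < N
    · rw [List.getD_eq_getElem?_getD, List.getElem?_replicate, if_pos h2]
      rfl
    · rw [List.getD_eq_getElem?_getD, List.getElem?_replicate, if_neg h2]
      rfl
  · have hrow : (List.replicate N (List.replicate N (-1 : Int))).getD (pyIdx N R) []
        = [] := by
      rw [List.getD_eq_getElem?_getD, List.getElem?_replicate, if_neg h]
      rfl
    rw [hrow]
    rfl

lemma d0_char (N : Nat) (n : Int) (hN : (N : Int) = n + 1) (hn : 1 ≤ n) (R S : Int)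
    (hR : canonV n R) (hS : canonV n S) :
    dget (dset (List.replicate N (List.replicate N (-1 : Int))) 1 n 0) R S
      = if R = 1 ∧ S = n then 0 else -1 := by
  have hsh0 : shapeG N (List.replicate N (List.replicate N (-1 : Int))) := by
    refine ⟨by simp, ?_⟩
    intro row hrow
    rw [List.eq_of_mem_replicate hrow]
    simp
  have h1 : canonV n (1 : Int) := ⟨by omega, by omega⟩
  have hnn : canonV n n := ⟨by omega, by omega⟩
  by_cases heq : R = 1 ∧ S = n
  · obtain ⟨rfl, rfl⟩ := heq
    rw [dget_dset_self_c hN hsh0 h1 hnn, if_pos ⟨rfl, rfl⟩]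
  · rw [dget_dset_ne_c hN hsh0 h1 hnn hR hS _ heq, dget_replicate, if_neg heq]

-- helpers for the untouched-start case (no edge reaches row 1 or row n: both loops do nothing)
lemma pyIdx_lt {len : Nat} {i : Int} (h1 : -(len : Int) ≤ i) (h2 : i < len) :
    pyIdx len i < len := by
  unfold pyIdx; split <;> omega

lemma length_buildG (n : Int) (uv : List (Int × Int)) :
    (buildG n uv).length = (n + 1).toNat := by
  unfold buildG
  have : ∀ (l : List (Int × Int)) (g0 : List (List Int)),
      (l.foldl (fun g e =>
        let g1 := g.set (pyIdx g.length e.1) ((gget g e.1) ++ [e.2])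
        g1.set (pyIdx g1.length e.2) ((gget g1 e.2) ++ [e.1])) g0).length = g0.length := by
    intro l
    induction l with
    | nil => intro g0; rfl
    | cons e l ih => intro g0; rw [List.foldl_cons, ih]; simp
  rw [this]; simp

lemma loopA_nil (g : List (List Int)) (c : List Int) (k : Nat) (d : List (List Int)) :
    loopA g c k [] d = d := by
  cases k <;> rfl

-- any row member has a mirror edge back into its own row
lemma mirror_buildG (n : Int) (uv : List (Int × Int))
    (he : ∀ e ∈ uv, (-(n + 1) ≤ e.1 ∧ e.1 ≤ n) ∧ (-(n + 1) ≤ e.2 ∧ e.2 ≤ n))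
    (hn : 1 ≤ n) (R p : Int) (hp : p ∈ gget (buildG n uv) R) :
    ∃ u, u ∈ gget (buildG n uv) p := by
  rw [mem_buildG] at hp
  obtain ⟨e, hemem, hcase⟩ := hp
  obtain ⟨⟨h11, h12⟩, h21, h22⟩ := he e hemem
  rcases hcase with ⟨hcls, hlt, rfl⟩ | ⟨hcls, hlt, rfl⟩
  · exact ⟨e.1, (mem_buildG n uv e.2 e.1).2
      ⟨e, hemem, Or.inr ⟨rfl, pyIdx_lt (by omega) (by omega), rfl⟩⟩⟩
  · exact ⟨e.2, (mem_buildG n uv e.1 e.2).2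
      ⟨e, hemem, Or.inl ⟨rfl, pyIdx_lt (by omega) (by omega), rfl⟩⟩⟩

-- a non-empty row 1 and row n force the Touch condition of Pre_
lemma rows_touch (n : Int) (uv : List (Int × Int))
    (he : ∀ e ∈ uv, (-(n + 1) ≤ e.1 ∧ e.1 ≤ n) ∧ (-(n + 1) ≤ e.2 ∧ e.2 ≤ n))
    (hn : 1 ≤ n)
    (h1 : gget (buildG n uv) 1 ≠ []) (h2 : gget (buildG n uv) n ≠ []) :
    (∃ e ∈ uv, e.1 = 1 ∨ e.1 = -n ∨ e.2 = 1 ∨ e.2 = -n) ∧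
    (∃ e ∈ uv, e.1 = n ∨ e.1 = -1 ∨ e.2 = n ∨ e.2 = -1) := by
  have hN : (((n + 1).toNat : Nat) : Int) = n + 1 := by omega
  constructor
  · obtain ⟨x, hx⟩ := List.exists_mem_of_ne_nil _ h1
    rw [mem_buildG] at hx
    obtain ⟨e, hemem, hcase⟩ := hx
    obtain ⟨⟨h11, h12⟩, h21, h22⟩ := he e hemem
    refine ⟨e, hemem, ?_⟩
    have hp1 : pyIdx (n + 1).toNat (1 : Int) = 1 := by
      unfold pyIdx; rw [if_neg (by omega)]; rfl
    rcases hcase with ⟨hcls, -, -⟩ | ⟨hcls, -, -⟩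
    · rw [hp1] at hcls
      unfold pyIdx at hcls
      split_ifs at hcls <;> omega
    · rw [hp1] at hcls
      unfold pyIdx at hcls
      split_ifs at hcls <;> omega
  · obtain ⟨x, hx⟩ := List.exists_mem_of_ne_nil _ h2
    rw [mem_buildG] at hx
    obtain ⟨e, hemem, hcase⟩ := hx
    obtain ⟨⟨h11, h12⟩, h21, h22⟩ := he e hemem
    refine ⟨e, hemem, ?_⟩
    have hpn : pyIdx (n + 1).toNat n = n.toNat := by
      unfold pyIdx; rw [if_neg (by omega)]
    rcases hcase with ⟨hcls, -, -⟩ | ⟨hcls, -, -⟩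
    · rw [hpn] at hcls
      unfold pyIdx at hcls
      split_ifs at hcls <;> omega
    · rw [hpn] at hcls
      unfold pyIdx at hcls
      split_ifs at hcls <;> omega

-- ===== VERDICT (by name: the statement is the Claim_ definition above) =====
theorem solve_sub_spec : Claim_equal_solve_sub := by
  unfold Claim_equal_solve_sub Spec_solve_sub
  intro n m c uv _ hpre
  obtain ⟨hn, he, hcl⟩ := hpre
  simp only [solve_sub, solve_sub_alt]
  have hN : (((n + 1).toNat : Nat) : Int) = n + 1 := by omega
  have hsh0 : shapeG (n + 1).toNat
      (List.replicate (n + 1).toNat (List.replicate (n + 1).toNat (-1 : Int))) := by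
    refine ⟨by simp, ?_⟩
    intro row hrow
    rw [List.eq_of_mem_replicate hrow]
    simp
  by_cases hT : (∃ e ∈ uv, e.1 = 1 ∨ e.1 = -n ∨ e.2 = 1 ∨ e.2 = -n) ∧
      (∃ e ∈ uv, e.1 = n ∨ e.1 = -1 ∨ e.2 = n ∨ e.2 = -1)
  · -- reachable start: all endpoints canonical, run the full push = pull argument
    have he' : ∀ e ∈ uv, (0 ≤ e.1 ∧ e.1 ≤ n) ∧ (0 ≤ e.2 ∧ e.2 ≤ n) := by
      intro e hemem
      obtain ⟨⟨h1, -, -⟩, h2, -, -⟩ := hcl hT e hemem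
      obtain ⟨⟨-, h3⟩, -, h4⟩ := he e hemem
      exact ⟨⟨h1, h3⟩, h2, h4⟩
    have hGb := buildG_canon n uv he'
    have hGsym := gsym_buildG n uv he'
    have hGb' : ∀ (p x : Int), x ∈ gget (buildG n uv) p
        → pyIdx (n + 1).toNat x < (n + 1).toNat :=
      fun p x hx => (pyIdx_canon hN (hGb p x hx)).2
    have hshd0 : shapeG (n + 1).toNat
        (dset (List.replicate (n + 1).toNat (List.replicate (n + 1).toNat (-1 : Int))) 1 n 0) :=
      shape_dset hsh0
    have h1c : canonV n (1 : Int) := ⟨by omega, by omega⟩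
    have hnc : canonV n n := ⟨by omega, by omega⟩
    have hchar := d0_char (n + 1).toNat n hN hn
    have hd0 : dget (dset (List.replicate (n + 1).toNat
        (List.replicate (n + 1).toNat (-1 : Int))) 1 n 0) 1 n = 0 := by
      rw [hchar 1 n h1c hnc, if_pos ⟨rfl, rfl⟩]
    have hJ0 : JInv (n + 1).toNat n (buildG n uv) c 0
        (dset (List.replicate (n + 1).toNat (List.replicate (n + 1).toNat (-1 : Int))) 1 n 0)
        [(1, n)] := by
      refine ⟨hshd0, ?_, ?_, ?_, ?_, ?_⟩
      · rintro pq hpq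
        rw [List.mem_singleton] at hpq
        rw [hpq]
        exact ⟨h1c, hnc⟩
      · rintro pq hpq
        rw [List.mem_singleton] at hpq
        rw [hpq]
        exact hd0
      · intro R S hR hS hv
        rw [hchar R S hR hS] at hv
        by_cases hif : R = 1 ∧ S = n
        · obtain ⟨rfl, rfl⟩ := hif
          exact List.mem_singleton.2 rfl
        · rw [if_neg hif] at hv
          omega
      · intro R S hR hS
        rw [hchar R S hR hS]
        split_ifs <;> omega
      · intro R S hR hS hv hcn p hp q hq
        rw [hchar p q (hGb R p hp) (hGb S q hq)]
        split_ifs with hif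
        · right; rfl
        · left; rfl
    have hcnt0 : cntNeg (dset (List.replicate (n + 1).toNat
        (List.replicate (n + 1).toNat (-1 : Int))) 1 n 0) + 1
        = (n + 1).toNat * (n + 1).toNat := by
      have hbase : dget (List.replicate (n + 1).toNat
          (List.replicate (n + 1).toNat (-1 : Int))) 1 n = -1 := dget_replicate _ _ _
      have := cntNeg_dset_eq (List.replicate (n + 1).toNat
          (List.replicate (n + 1).toNat (-1 : Int))) hsh0 1 n 0 (by norm_num)
        (pyIdx_canon hN h1c).2 (pyIdx_canon hN hnc).2 hbase
      have h2 := cntNeg_replicate (n + 1).toNat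
      omega
    have hNN1 : 1 ≤ (n + 1).toNat * (n + 1).toNat := by
      have : 2 ≤ (n + 1).toNat := by omega
      nlinarith
    have hmainL := mainL (n + 1).toNat (buildG n uv) c hGb'
      ((n + 1).toNat * (n + 1).toNat)
      ((n + 1).toNat * (n + 1).toNat + 2) ((n + 1).toNat * (n + 1).toNat + 2)
      [(1, n)]
      (dset (List.replicate (n + 1).toNat (List.replicate (n + 1).toNat (-1 : Int))) 1 n 0)
      0 hshd0 (by omega)
      (by rintro pq hpq
          rw [List.mem_singleton] at hpq
          rw [hpq]
          exact hd0)
      (by omega) (by simp; omega) (by omega)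
    have hmain2 := main2 (n + 1).toNat n (buildG n uv) c (vertsL n (buildG n uv)) hN hGb hGsym
      (mem_vertsL n (buildG n uv))
      ((n + 1).toNat * (n + 1).toNat - 1)
      ((n + 1).toNat * (n + 1).toNat + 2) ((n + 1).toNat * (n + 1).toNat)
      [(1, n)]
      (dset (List.replicate (n + 1).toNat (List.replicate (n + 1).toNat (-1 : Int))) 1 n 0)
      0 (by omega) hJ0 (by omega) (by omega) (by omega)
    have hrange : PySem.List.pyRange ((0 : Int) + 1)
        ((0 : Int) + 1 + (((n + 1).toNat * (n + 1).toNat : Nat) : Int)) 1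
        = PySem.List.pyRange 1 ((n + 1) * (n + 1) + 1) 1 := by
      have h1 : ((0 : Int) + 1) = 1 := by norm_num
      have h2 : ((1 : Int) + (((n + 1).toNat * (n + 1).toNat : Nat) : Int))
          = (n + 1) * (n + 1) + 1 := by
        push_cast
        rw [hN]
        ring
      rw [h1, h2]
    rw [hmainL] at *
    rw [hmain2, hrange]
  · -- untouched start: A's BFS scans no pair and B's first sweep is empty
    have hsplit : gget (buildG n uv) 1 = [] ∨ gget (buildG n uv) n = [] := by
      by_contra hc
      exact hT (rows_touch n uv he hn (fun h => hc (Or.inl h)) (fun h => hc (Or.inr h)))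
    have hnode : nodeA (buildG n uv) c 1 n
        (dset (List.replicate (n + 1).toNat (List.replicate (n + 1).toNat (-1 : Int))) 1 n 0,
          ([] : List (Int × Int))) =
        (dset (List.replicate (n + 1).toNat (List.replicate (n + 1).toNat (-1 : Int))) 1 n 0,
          ([] : List (Int × Int))) := by
      rcases hsplit with h | h
      · unfold nodeA
        rw [h]
        rfl
      · unfold nodeA
        rw [h]
        simp only [List.foldl_nil]
        exact List.foldl_fixed _
    have hA : loopA (buildG n uv) c ((n + 1).toNat * (n + 1).toNat + 2) [(1, n)]
        (dset (List.replicate (n + 1).toNat (List.replicate (n + 1).toNat (-1 : Int))) 1 n 0)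
        = dset (List.replicate (n + 1).toNat (List.replicate (n + 1).toNat (-1 : Int))) 1 n 0 := by
      rw [show ((n + 1).toNat * (n + 1).toNat + 2) = ((n + 1).toNat * (n + 1).toNat + 1) + 1
        from rfl]
      rw [show ([(1, n)] : List (Int × Int)) = (1, n) :: [] from rfl]
      rw [loopA_cons, hnode]
      simp only [List.nil_append]
      exact loopA_nil _ _ _ _
    have hsw : sweepUpd (vertsL n (buildG n uv)) (buildG n uv) c
        (dset (List.replicate (n + 1).toNat (List.replicate (n + 1).toNat (-1 : Int))) 1 n 0)
        = [] := by
      rw [List.eq_nil_iff_forall_not_mem]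
      rintro ⟨R, S⟩ hmem
      rw [mem_sweepUpd] at hmem
      obtain ⟨-, -, -, ⟨p, hp, q, hq, hne⟩, -⟩ := hmem
      have hcls : pyIdx (n + 1).toNat p = pyIdx (n + 1).toNat 1 ∧
          pyIdx (n + 1).toNat q = pyIdx (n + 1).toNat n := by
        by_contra hcc
        apply hne
        rw [dget_dset_ne hsh0 (fun hab => hcc ⟨hab.1.symm, hab.2.symm⟩)]
        exact dget_replicate _ _ _
      obtain ⟨u, hu⟩ := mirror_buildG n uv he hn R p hp
      obtain ⟨u2, hu2⟩ := mirror_buildG n uv he hn S q hq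
      have hlen := length_buildG n uv
      rcases hsplit with h | h
      · have hgp : gget (buildG n uv) p = gget (buildG n uv) 1 :=
          gget_congr2 _ (by rw [hlen]; exact hcls.1)
        rw [hgp, h] at hu
        exact absurd hu (List.not_mem_nil)
      · have hgq : gget (buildG n uv) q = gget (buildG n uv) n :=
          gget_congr2 _ (by rw [hlen]; exact hcls.2)
        rw [hgq, h] at hu2
        exact absurd hu2 (List.not_mem_nil)
    have hrange : PySem.List.pyRange 1 ((n + 1) * (n + 1) + 1) 1
        = 1 :: PySem.List.pyRange (1 + 1) ((n + 1) * (n + 1) + 1) 1 :=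
      PySem.List.pyRange_one_cons (by nlinarith)
    rw [hA, hrange, loopJ_cons, if_pos (by rw [hsw]; rfl)]
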